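/- GENERATED by mk_final_copies.py from the proof of the farm's unit `start_decoder.3` (farm:start_decoder.3.1: Proof.lean) as the
   re-elaboration sweep compiled it — do not edit. -/
/-
  Unit `start_decoder.3`: segment 3 of `start_decoder` (0x113c0c … 0x113d39 and the ten error stubs 0x113d8b … 0x113e3a; C lines
  3642 – 3666: the fields of the identification header, HD1 – HD3).

  HOW THE PROOF IS ORGANISED. The segment is cut once more, before the argument set-up of each of its ten calls of a reader
  (getn, vorbis_validate, get32 ×5, get8 ×3) and at the entry of each of the ten error stubs: 20 CHUNKS, each a lemma
  `chunk<k>` / `stub<k>` that walks from the assertion `SegMid u₀ g A pc k v` (work/Lemmas.lean: `Body3` at the program counter `pc`,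
  with the header clauses `Hd k` established so far) to the `SegMid` of the next cut point, to the `SegMid` of a stub, or — the stubs —
  to `AtERR`. Point `SD 0` is carried through every chunk by ONE frame lemma (`MidMem.frame`: no clause of `SD 0` reads the four
  header fields, `stream`, `eof` / `error`, the frame object `header` or the stack below the steady stack pointer); HD1 – HD3 are
  added where the tests are (`chunk3`, `chunk4`, `chunk8`), and `sd1_of_sd0` makes `SD 1` at the exit. `onward<k>` chains the chunks.
-/
import Vorbis.Spec.Units.start_decoder_3
import Vorbis.Spec.StartDecoderATest
import Vorbis.Spec.Worked.start_decoder_3_Lemmas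
namespace Vorbis.Spec.start_decoder_3
open X86 X86.User Asan Vorbis Vorbis.Spec Vorbis.Spec.StartDecoder

set_option maxRecDepth 4000
set_option maxHeartbeats 4000000

/-- cut 0x113c29: `lea rdi, [rsp+0xa0]` before `vorbis_validate(header)` (line 3643) -/
abbrev pcC1 : Word := 0x113c29
/-- cut 0x113c3e: `mov rdi, rbp` before `get32(f)` (line 3645) -/
abbrev pcC2 : Word := 0x113c3e
/-- cut 0x113c4e: `mov rdi, rbp` before `get8(f)` (line 3646) -/
abbrev pcC3 : Word := 0x113c4e
/-- cut 0x113c7a: `mov rdi, rbp` before `get32(f)` (line 3648) -/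
abbrev pcC4 : Word := 0x113c7a
/-- cut 0x113c9a: `mov rdi, rbp` before `get32(f)` (line 3649) -/
abbrev pcC5 : Word := 0x113c9a
/-- cut 0x113d2f: `mov rdi, rbp` before `get8(f)` (line 3665) -/
abbrev pcC9 : Word := 0x113d2f
/-- stub 0x113d8b: `return error(f, VORBIS_unexpected_eof)` (line 3642) -/
abbrev pcS0 : Word := 0x113d8b
/-- stub 0x113d9d: `return error(f, VORBIS_invalid_first_page)` (line 3643) -/
abbrev pcS1 : Word := 0x113d9d
/-- stub 0x113daf: `return error(f, VORBIS_invalid_first_page)` (line 3645) -/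
abbrev pcS2 : Word := 0x113daf
/-- stub 0x113dc1: `return error(f, VORBIS_invalid_first_page)` (line 3646) -/
abbrev pcS3 : Word := 0x113dc1
/-- stub 0x113dd3: `return error(f, VORBIS_too_many_channels)` (line 3647) -/
abbrev pcS4 : Word := 0x113dd3
/-- stub 0x113de5: `return error(f, VORBIS_invalid_first_page)` (line 3648) -/
abbrev pcS5 : Word := 0x113de5
/-- stub 0x113df7: `return error(f, VORBIS_invalid_setup)` (line 3659) -/
abbrev pcS6 : Word := 0x113df7
/-- stub 0x113e09: `return error(f, VORBIS_invalid_setup)` (line 3660) -/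
abbrev pcS7 : Word := 0x113e09
/-- stub 0x113e1b: `return error(f, VORBIS_invalid_setup)` (line 3661) -/
abbrev pcS8 : Word := 0x113e1b
/-- stub 0x113e2d: `return error(f, VORBIS_invalid_first_page)` (line 3666) -/
abbrev pcS9 : Word := 0x113e2d

/-- **0x113c0c – 0x113c23** (line 3642 `if (!getn(f, header, 6)) return error(…)`): the destination is the frame object `header`, off the input and off `*f`. -/
theorem chunk0 (Lay : Layout) (hLay : Lay.hi = 0x1000000) (μ : Microarch) (hμ : UserX.MicroOK μ) (u₀ : State)
    (hcode : HasCodeNat Lay u₀ Vorbis.L.start_decoder.entry Vorbis.Code.code_start_decoder.nat Vorbis.L.start_decoder.size)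
    (h_getn : ∀ (others : List Obj) (frames : List (Nat × FrameLayout)) (Blk : Block → Prop) (len : Nat), Calls Lay μ Vorbis.WayInv (Vorbis.conv u₀) Vorbis.L.getn.entry (Vorbis.Spec.getn.spec others frames Blk len))
    (g : Ghost) (A : Arena × List Obj) (k : Nat) (v : State) (hm : SegMid u₀ g A pc_3 k v) :
    ReachVia Lay μ WayInv v (fun w => SegMid u₀ g A pcC1 k w ∨ SegMid u₀ g A pcS0 k w) := by
  have he := hm.entry
  v_entry he
  simp only [depth] at he_room he_stack
  -- the present state under the walker's names (and a copy the walker does not consume)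
  have w_rip := hm.rip
  have w_rsp := hm.rsp
  have hv_rsp := hm.rsp
  have w_rbp := hm.rbp
  have hv_rbp := hm.rbp
  have w_eq : Mem.EqOn Vorbis.L.textLo Vorbis.L.textHi u₀.mem v.mem := hm.mm.code
  have hdf : v.flags .df = false := (show abiInv _ from hm.inv).1
  have hmx : v.mxcsr &&& 0x1F80 = 0x1F80 := (show abiInv _ from hm.inv).2
  have hsse := Vorbis.sseOK_of_abiInv hm.inv
  -- where `*f` is: for the side goals of the stores
  have hf1 : 0x119d40 ≤ (g.e.reg .rdi).toNat := hm.pos.flo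
  have hf2 : (g.e.reg .rdi).toNat + 1808 ≤ 0xC00000 := hm.pos.fhi
  have hgetn := h_getn A.2 g.frames' (g.Blk A) g.len
  have e6 : (argInt (Word.ofBV 6#32)).toNat = 6 := by decide
  u_walk hcode [hμ.vendor] until [pcC1, pcS0] span [Vorbis.L.textLo, Vorbis.L.textHi] side (v_side)
  · v_inv
  · -- getn's precondition: the reader's, `0 ≤ 6`, `Live(header, 6)`, the destination apart from the input and the fields
    have hp := hm.pos
    have hr := hp.r
    have hbr := hm.mm.sd.bits.OBR
    have hs1 := hm.mm.sd.bits.S1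
    simp only [voff] at hbr hs1
    obtain ⟨p1, p2, p3, p4, p5, p6, p7⟩ := hp
    refine ⟨hm.readerPre _ w_mem w_rsp w_rdi, ?_, Or.inr ?_, ?_, ?_⟩
    · rw [w_rdx]
      decide
    · rw [w_rsi, w_rdx, e6, toNat_header hm.pos]
      exact header_live g A
    · rw [w_rsi, w_rdx, e6, toNat_header hm.pos]
      simp only [voff]
      omega
    · rw [w_rsi, w_rdx, w_rdi, e6, toNat_header hm.pos]
      show g.R + 0xa0 + 6 ≤ g.f ∨ g.f + 1808 ≤ g.R + 0xa0 ∨ _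
      omega
  · v_after_call w_rsp_113c1c w_mem_113c1c
    have hpost : GetnPost (g.Blk A) g.len (s_113c1c.reg .rdi).toNat (s_113c1c.reg .rsi).toNat (argInt (s_113c1c.reg .rdx))
        s_113c1c s_113c1cr := w_post
    rw [w_rdi_113c1c] at hpost
    simp only [w_rdi_113c1c, w_rsi_113c1c, w_rdx_113c1c, e6] at w_same
    have hsame : Mem.SameExcept [⟨(g.e.reg .rsp).toNat - 1888, (g.e.reg .rsp).toNat - 1480⟩,
        ⟨(g.e.reg .rdi).toNat + 48, (g.e.reg .rdi).toNat + 56⟩, ⟨(g.e.reg .rdi).toNat + 136, (g.e.reg .rdi).toNat + 144⟩,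
        ⟨(g.e.reg .rsp).toNat - 1320, (g.e.reg .rsp).toNat - 1314⟩] v.mem s_113c1cr.mem := by
      u_same
    have hbits : Bits (g.Blk A) g.len s_113c1cr.mem g.f := hpost.reader.bits
    have hrbp : s_113c1cr.reg .rbp = g.e.reg .rdi := by
      rw [w_kept .rbp rfl]
      exact hv_rbp
    obtain ⟨z, w_rax⟩ : ∃ z, s_113c1cr.reg .rax = z := ⟨_, rfl⟩
    have w_rbp := hrbp
    u_walk hcode [hμ.vendor] until [pcC1, pcS0] span [Vorbis.L.textLo, Vorbis.L.textHi] side (v_side)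
    · -- the input ended: the error stub of line 3642
      refine ReachVia.done (Or.inr ?_)
      refine hm.after w_rip w_rsp ?_ ?_ (w_mem ▸ hsame) (callee_std hm.pos) (w_mem ▸ hbits)
      · rw [w_kept .rbp rfl]
        exact hv_rbp
      · v_inv
    · -- on to line 3643
      refine ReachVia.done (Or.inl ?_)
      refine hm.after w_rip w_rsp ?_ ?_ (w_mem ▸ hsame) (callee_std hm.pos) (w_mem ▸ hbits)
      · rw [w_kept .rbp rfl]
        exact hv_rbp
      · v_inv

/-- **0x113c29 – 0x113c38** (line 3643 `if (!vorbis_validate(header)) return error(…)`): the callee reads the frame object `header` and the global `vorbis`; it writes nothing but its stack. -/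
theorem chunk1 (Lay : Layout) (hLay : Lay.hi = 0x1000000) (μ : Microarch) (hμ : UserX.MicroOK μ) (u₀ : State)
    (hcode : HasCodeNat Lay u₀ Vorbis.L.start_decoder.entry Vorbis.Code.code_start_decoder.nat Vorbis.L.start_decoder.size)
    (h_validate : ∀ (others : List Obj) (frames : List (Nat × FrameLayout)), Calls Lay μ Vorbis.WayInv (Vorbis.conv u₀) Vorbis.L.vorbis_validate.entry (Vorbis.Spec.vorbis_validate.spec others frames))
    (g : Ghost) (A : Arena × List Obj) (k : Nat) (v : State) (hm : SegMid u₀ g A pcC1 k v) :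
    ReachVia Lay μ WayInv v (fun w => SegMid u₀ g A pcC2 k w ∨ SegMid u₀ g A pcS1 k w) := by
  have he := hm.entry
  v_entry he
  simp only [depth] at he_room he_stack
  -- the present state under the walker's names (and a copy the walker does not consume)
  have w_rip := hm.rip
  have w_rsp := hm.rsp
  have hv_rsp := hm.rsp
  have w_rbp := hm.rbp
  have hv_rbp := hm.rbp
  have w_eq : Mem.EqOn Vorbis.L.textLo Vorbis.L.textHi u₀.mem v.mem := hm.mm.code
  have hdf : v.flags .df = false := (show abiInv _ from hm.inv).1
  have hmx : v.mxcsr &&& 0x1F80 = 0x1F80 := (show abiInv _ from hm.inv).2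
  have hsse := Vorbis.sseOK_of_abiInv hm.inv
  -- where `*f` is: for the side goals of the stores
  have hf1 : 0x119d40 ≤ (g.e.reg .rdi).toNat := hm.pos.flo
  have hf2 : (g.e.reg .rdi).toNat + 1808 ≤ 0xC00000 := hm.pos.fhi
  have hvalidate := h_validate A.2 g.frames'
  u_walk hcode [hμ.vendor] until [pcC2, pcS1] span [Vorbis.L.textLo, Vorbis.L.textHi] side (v_side)
  · v_inv
  · refine ⟨hm.shadowPre _ w_mem w_rsp, ?_, vorbis_live hm.hand⟩
    rw [w_rdi, toNat_header hm.pos]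
    exact header_live g A
  · v_after_call w_rsp_113c31 w_mem_113c31
    have hsame : Mem.SameExcept [⟨(g.e.reg .rsp).toNat - 1888, (g.e.reg .rsp).toNat - 1480⟩,
        ⟨(g.e.reg .rdi).toNat + 48, (g.e.reg .rdi).toNat + 56⟩, ⟨(g.e.reg .rdi).toNat + 136, (g.e.reg .rdi).toNat + 144⟩,
        ⟨(g.e.reg .rsp).toNat - 1320, (g.e.reg .rsp).toNat - 1314⟩] v.mem s_113c31r.mem := by
      u_same
    have hsame2 : Mem.SameExcept [⟨(g.e.reg .rsp).toNat - 1888, (g.e.reg .rsp).toNat - 1480⟩,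
        ⟨(g.e.reg .rdi).toNat, (g.e.reg .rdi).toNat + 8⟩, ⟨(g.e.reg .rdi).toNat + 152, (g.e.reg .rdi).toNat + 160⟩,
        ⟨(g.e.reg .rdi).toNat + 136, (g.e.reg .rdi).toNat + 144⟩] v.mem s_113c31r.mem := by
      clear hsame
      u_same
    have hbits : Bits (g.Blk A) g.len s_113c31r.mem g.f := bits_own hm.pos hm.mm.sd.bits hsame2 (own_std hm.pos)
    have hrbp : s_113c31r.reg .rbp = g.e.reg .rdi := by
      rw [w_kept .rbp rfl]
      exact hv_rbp
    obtain ⟨z, w_rax⟩ : ∃ z, s_113c31r.reg .rax = z := ⟨_, rfl⟩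
    have w_rbp := hrbp
    u_walk hcode [hμ.vendor] until [pcC2, pcS1] span [Vorbis.L.textLo, Vorbis.L.textHi] side (v_side)
    · -- not the identification header: the error stub of line 3643
      refine ReachVia.done (Or.inr ?_)
      refine hm.after w_rip w_rsp ?_ ?_ (w_mem ▸ hsame) (callee_std hm.pos) (w_mem ▸ hbits)
      · rw [w_kept .rbp rfl]
        exact hv_rbp
      · v_inv
    · -- on to line 3645
      refine ReachVia.done (Or.inl ?_)
      refine hm.after w_rip w_rsp ?_ ?_ (w_mem ▸ hsame) (callee_std hm.pos) (w_mem ▸ hbits)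
      · rw [w_kept .rbp rfl]
        exact hv_rbp
      · v_inv

/-- **0x113c3e – 0x113c48** (line 3645 `if (get32(f) != 0) return error(…)`): one call of a reader, one test. -/
theorem chunk2 (Lay : Layout) (hLay : Lay.hi = 0x1000000) (μ : Microarch) (hμ : UserX.MicroOK μ) (u₀ : State)
    (hcode : HasCodeNat Lay u₀ Vorbis.L.start_decoder.entry Vorbis.Code.code_start_decoder.nat Vorbis.L.start_decoder.size)
    (h_get32 : ∀ (others : List Obj) (frames : List (Nat × FrameLayout)) (Blk : Block → Prop) (len : Nat), Calls Lay μ Vorbis.WayInv (Vorbis.conv u₀) Vorbis.L.get32.entry (Vorbis.Spec.get32.spec others frames Blk len))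
    (g : Ghost) (A : Arena × List Obj) (k : Nat) (v : State) (hm : SegMid u₀ g A pcC2 k v) :
    ReachVia Lay μ WayInv v (fun w => SegMid u₀ g A pcC3 k w ∨ SegMid u₀ g A pcS2 k w) := by
  have he := hm.entry
  v_entry he
  simp only [depth] at he_room he_stack
  -- the present state under the walker's names (and a copy the walker does not consume)
  have w_rip := hm.rip
  have w_rsp := hm.rsp
  have hv_rsp := hm.rsp
  have w_rbp := hm.rbp
  have hv_rbp := hm.rbp
  have w_eq : Mem.EqOn Vorbis.L.textLo Vorbis.L.textHi u₀.mem v.mem := hm.mm.code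
  have hdf : v.flags .df = false := (show abiInv _ from hm.inv).1
  have hmx : v.mxcsr &&& 0x1F80 = 0x1F80 := (show abiInv _ from hm.inv).2
  have hsse := Vorbis.sseOK_of_abiInv hm.inv
  -- where `*f` is: for the side goals of the stores
  have hf1 : 0x119d40 ≤ (g.e.reg .rdi).toNat := hm.pos.flo
  have hf2 : (g.e.reg .rdi).toNat + 1808 ≤ 0xC00000 := hm.pos.fhi
  have hget32 := h_get32 A.2 g.frames' (g.Blk A) g.len
  u_walk hcode [hμ.vendor] until [pcC3, pcS2] span [Vorbis.L.textLo, Vorbis.L.textHi] side (v_side)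
  · v_inv
  · exact hm.readerPre _ w_mem w_rsp w_rdi
  · v_after_call w_rsp_113c41 w_mem_113c41
    have hpost : Get32Post (g.Blk A) g.len (s_113c41.reg .rdi).toNat s_113c41 s_113c41r := w_post
    rw [w_rdi_113c41] at hpost
    simp only [w_rdi_113c41] at w_same
    have hsame : Mem.SameExcept [⟨(g.e.reg .rsp).toNat - 1888, (g.e.reg .rsp).toNat - 1480⟩,
        ⟨(g.e.reg .rdi).toNat + 48, (g.e.reg .rdi).toNat + 56⟩, ⟨(g.e.reg .rdi).toNat + 136, (g.e.reg .rdi).toNat + 144⟩,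
        ⟨(g.e.reg .rsp).toNat - 1320, (g.e.reg .rsp).toNat - 1314⟩] v.mem s_113c41r.mem := by
      u_same
    have hbits : Bits (g.Blk A) g.len s_113c41r.mem g.f := hpost.reader.bits
    have hrbp : s_113c41r.reg .rbp = g.e.reg .rdi := by
      rw [w_kept .rbp rfl]
      exact hv_rbp
    obtain ⟨z, w_rax⟩ : ∃ z, s_113c41r.reg .rax = z := ⟨_, rfl⟩
    have w_rbp := hrbp
    u_walk hcode [hμ.vendor] until [pcC3, pcS2] span [Vorbis.L.textLo, Vorbis.L.textHi] side (v_side)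
    · -- eax ≠ 0: the error stub of line 3645
      refine ReachVia.done (Or.inr ?_)
      refine hm.after w_rip w_rsp ?_ ?_ (w_mem ▸ hsame) (callee_std hm.pos) (w_mem ▸ hbits)
      · rw [w_kept .rbp rfl]
        exact hv_rbp
      · v_inv
    · -- eax = 0: on to line 3646
      refine ReachVia.done (Or.inl ?_)
      refine hm.after w_rip w_rsp ?_ ?_ (w_mem ▸ hsame) (callee_std hm.pos) (w_mem ▸ hbits)
      · rw [w_kept .rbp rfl]
        exact hv_rbp
      · v_inv

/-- **0x113c4e – 0x113c74** (lines 3646 – 3647 `f->channels = get8(f); if (!f->channels) …; if (f->channels > 16) …`): the store comes BEFORE the two tests; HD1 on the fall-through. -/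
theorem chunk3 (Lay : Layout) (hLay : Lay.hi = 0x1000000) (μ : Microarch) (hμ : UserX.MicroOK μ) (u₀ : State)
    (hcode : HasCodeNat Lay u₀ Vorbis.L.start_decoder.entry Vorbis.Code.code_start_decoder.nat Vorbis.L.start_decoder.size)
    (h_get8 : ∀ (others : List Obj) (frames : List (Nat × FrameLayout)) (Blk : Block → Prop) (len : Nat), Calls Lay μ Vorbis.WayInv (Vorbis.conv u₀) Vorbis.L.get8.entry (Vorbis.Spec.get8.spec others frames Blk len))
    (h_store4 : Asan.SmallCheck Lay μ Vorbis.WayInv (Vorbis.CodeOK u₀) [.rax, .rcx, .rdx] 4 Vorbis.L.__asan_store4_noabort.entry)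
    (g : Ghost) (A : Arena × List Obj) (v : State) (hm : SegMid u₀ g A pcC3 0 v) :
    ReachVia Lay μ WayInv v (fun w => SegMid u₀ g A pcC4 1 w ∨ SegMid u₀ g A pcS3 0 w ∨ SegMid u₀ g A pcS4 0 w) := by
  have he := hm.entry
  v_entry he
  simp only [depth] at he_room he_stack
  -- the present state under the walker's names (and a copy the walker does not consume)
  have w_rip := hm.rip
  have w_rsp := hm.rsp
  have hv_rsp := hm.rsp
  have w_rbp := hm.rbp
  have hv_rbp := hm.rbp
  have w_eq : Mem.EqOn Vorbis.L.textLo Vorbis.L.textHi u₀.mem v.mem := hm.mm.code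
  have hdf : v.flags .df = false := (show abiInv _ from hm.inv).1
  have hmx : v.mxcsr &&& 0x1F80 = 0x1F80 := (show abiInv _ from hm.inv).2
  have hsse := Vorbis.sseOK_of_abiInv hm.inv
  -- where `*f` is: for the side goals of the stores
  have hf1 : 0x119d40 ≤ (g.e.reg .rdi).toNat := hm.pos.flo
  have hf2 : (g.e.reg .rdi).toNat + 1808 ≤ 0xC00000 := hm.pos.fhi
  have hget8 := h_get8 A.2 g.frames' (g.Blk A) g.len
  u_walk hcode [hμ.vendor] until [pcC4, pcS3, pcS4] span [Vorbis.L.textLo, Vorbis.L.textHi] side (v_side)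
  · v_inv
  · exact hm.readerPre _ w_mem w_rsp w_rdi
  · v_after_call w_rsp_113c51 w_mem_113c51
    have hpost : Get8Post (g.Blk A) g.len (s_113c51.reg .rdi).toNat s_113c51 s_113c51r := w_post
    rw [w_rdi_113c51] at hpost
    simp only [w_rdi_113c51] at w_same
    have hsame : Mem.SameExcept [⟨(g.e.reg .rsp).toNat - 1888, (g.e.reg .rsp).toNat - 1480⟩,
        ⟨(g.e.reg .rdi).toNat + 48, (g.e.reg .rdi).toNat + 56⟩, ⟨(g.e.reg .rdi).toNat + 136, (g.e.reg .rdi).toNat + 144⟩,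
        ⟨(g.e.reg .rsp).toNat - 1320, (g.e.reg .rsp).toNat - 1314⟩] v.mem s_113c51r.mem := by
      u_same
    have hbits : Bits (g.Blk A) g.len s_113c51r.mem g.f := hpost.reader.bits
    have hrbp : s_113c51r.reg .rbp = g.e.reg .rdi := by
      rw [w_kept .rbp rfl]
      exact hv_rbp
    obtain ⟨z, w_rax⟩ : ∃ z, s_113c51r.reg .rax = z := ⟨_, rfl⟩
    have w_rbp := hrbp
    u_walk hcode [hμ.vendor] until [pcC4, pcS3, pcS4] span [Vorbis.L.textLo, Vorbis.L.textHi] side (v_side)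
    · -- the check of `f->channels = …` (0x113c5e): a field of the live object `*f`
      have hs2 : Mem.SameExcept [⟨(g.e.reg .rsp).toNat - 1888, (g.e.reg .rsp).toNat - 1480⟩,
        ⟨(g.e.reg .rdi).toNat + 48, (g.e.reg .rdi).toNat + 56⟩, ⟨(g.e.reg .rdi).toNat + 136, (g.e.reg .rdi).toNat + 144⟩,
        ⟨(g.e.reg .rsp).toNat - 1320, (g.e.reg .rsp).toNat - 1314⟩,
        ⟨(g.e.reg .rdi).toNat, (g.e.reg .rdi).toNat + 8⟩, ⟨(g.e.reg .rdi).toNat + 152, (g.e.reg .rdi).toNat + 160⟩] v.mem s_113c5e.mem := by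
        u_same
      refine hm.check4 hs2 (allowed_std hm.pos) _ 4 ?_ (by omega)
      show (g.e.reg .rdi + 4).toNat = (g.e.reg .rdi).toNat + 4
      u_omega
    · -- channels = 0: the error stub of line 3646
      have hs2 : Mem.SameExcept [⟨(g.e.reg .rsp).toNat - 1888, (g.e.reg .rsp).toNat - 1480⟩,
        ⟨(g.e.reg .rdi).toNat + 48, (g.e.reg .rdi).toNat + 56⟩, ⟨(g.e.reg .rdi).toNat + 136, (g.e.reg .rdi).toNat + 144⟩,
        ⟨(g.e.reg .rsp).toNat - 1320, (g.e.reg .rsp).toNat - 1314⟩,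
        ⟨(g.e.reg .rdi).toNat, (g.e.reg .rdi).toNat + 8⟩, ⟨(g.e.reg .rdi).toNat + 152, (g.e.reg .rdi).toNat + 160⟩] v.mem s_113c6a.mem := by
        u_same
      have hs3 : Mem.SameExcept [⟨(g.e.reg .rsp).toNat - 1888, (g.e.reg .rsp).toNat - 1480⟩,
        ⟨(g.e.reg .rdi).toNat, (g.e.reg .rdi).toNat + 8⟩, ⟨(g.e.reg .rdi).toNat + 152, (g.e.reg .rdi).toNat + 160⟩,
        ⟨(g.e.reg .rdi).toNat + 136, (g.e.reg .rdi).toNat + 144⟩] s_113c51r.mem s_113c6a.mem := by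
        clear hs2 hsame
        u_same
      refine ReachVia.done (Or.inr (Or.inl ?_))
      refine hm.afterStore w_rip w_rsp ?_ ?_ hs2 (allowed_std hm.pos) (bits_own hm.pos hbits hs3 (own_std hm.pos)) ?_
      · rw [w_kept .rbp rfl]
        exact hv_rbp
      · v_inv
      · exact Hd.zero _ _
    · -- channels > 16: the error stub of line 3647
      have hs2 : Mem.SameExcept [⟨(g.e.reg .rsp).toNat - 1888, (g.e.reg .rsp).toNat - 1480⟩,
        ⟨(g.e.reg .rdi).toNat + 48, (g.e.reg .rdi).toNat + 56⟩, ⟨(g.e.reg .rdi).toNat + 136, (g.e.reg .rdi).toNat + 144⟩,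
        ⟨(g.e.reg .rsp).toNat - 1320, (g.e.reg .rsp).toNat - 1314⟩,
        ⟨(g.e.reg .rdi).toNat, (g.e.reg .rdi).toNat + 8⟩, ⟨(g.e.reg .rdi).toNat + 152, (g.e.reg .rdi).toNat + 160⟩] v.mem s_113c74.mem := by
        u_same
      have hs3 : Mem.SameExcept [⟨(g.e.reg .rsp).toNat - 1888, (g.e.reg .rsp).toNat - 1480⟩,
        ⟨(g.e.reg .rdi).toNat, (g.e.reg .rdi).toNat + 8⟩, ⟨(g.e.reg .rdi).toNat + 152, (g.e.reg .rdi).toNat + 160⟩,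
        ⟨(g.e.reg .rdi).toNat + 136, (g.e.reg .rdi).toNat + 144⟩] s_113c51r.mem s_113c74.mem := by
        clear hs2 hsame
        u_same
      refine ReachVia.done (Or.inr (Or.inr ?_))
      refine hm.afterStore w_rip w_rsp ?_ ?_ hs2 (allowed_std hm.pos) (bits_own hm.pos hbits hs3 (own_std hm.pos)) ?_
      · rw [w_kept .rbp rfl]
        exact hv_rbp
      · v_inv
      · exact Hd.zero _ _
    · -- HD1: 1 ≤ channels ≤ 16
      have hs2 : Mem.SameExcept [⟨(g.e.reg .rsp).toNat - 1888, (g.e.reg .rsp).toNat - 1480⟩,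
        ⟨(g.e.reg .rdi).toNat + 48, (g.e.reg .rdi).toNat + 56⟩, ⟨(g.e.reg .rdi).toNat + 136, (g.e.reg .rdi).toNat + 144⟩,
        ⟨(g.e.reg .rsp).toNat - 1320, (g.e.reg .rsp).toNat - 1314⟩,
        ⟨(g.e.reg .rdi).toNat, (g.e.reg .rdi).toNat + 8⟩, ⟨(g.e.reg .rdi).toNat + 152, (g.e.reg .rdi).toNat + 160⟩] v.mem s_113c74.mem := by
        u_same
      have hs3 : Mem.SameExcept [⟨(g.e.reg .rsp).toNat - 1888, (g.e.reg .rsp).toNat - 1480⟩,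
        ⟨(g.e.reg .rdi).toNat, (g.e.reg .rdi).toNat + 8⟩, ⟨(g.e.reg .rdi).toNat + 152, (g.e.reg .rdi).toNat + 160⟩,
        ⟨(g.e.reg .rdi).toNat + 136, (g.e.reg .rdi).toNat + 144⟩] s_113c51r.mem s_113c74.mem := by
        clear hs2 hsame
        u_same
      refine ReachVia.done (Or.inl ?_)
      refine hm.afterStore w_rip w_rsp ?_ ?_ hs2 (allowed_std hm.pos) (bits_own hm.pos hbits hs3 (own_std hm.pos)) ?_
      · rw [w_kept .rbp rfl]
        exact hv_rbp
      · v_inv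
      · have e4 : g.e.reg .rdi + 4 = addr (g.f + 4) := addr_field hm.pos 4 (by omega)
        have hch : stb_vorbis.channels s_113c74.mem g.f = (BitVec.zeroExtend 32 (Word.part Width.w8 z)).toInt := by
          rw [w_mem, e4]
          simp only [vacc, voff]
          exact Mem.i32_writeLE_same_bv _ _ _
        refine ⟨fun _ => ?_, fun h2 => absurd h2 (by omega), fun h3 => absurd h3 (by omega)⟩
        rw [hch]
        exact chan_range _ hbr_113c6a hbr_113c74

/-- **0x113c7a – 0x113c94** (line 3648 `f->sample_rate = get32(f); if (!f->sample_rate) …`): the store comes before the test; HD2 on the fall-through, HD1 kept. -/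
theorem chunk4 (Lay : Layout) (hLay : Lay.hi = 0x1000000) (μ : Microarch) (hμ : UserX.MicroOK μ) (u₀ : State)
    (hcode : HasCodeNat Lay u₀ Vorbis.L.start_decoder.entry Vorbis.Code.code_start_decoder.nat Vorbis.L.start_decoder.size)
    (h_get32 : ∀ (others : List Obj) (frames : List (Nat × FrameLayout)) (Blk : Block → Prop) (len : Nat), Calls Lay μ Vorbis.WayInv (Vorbis.conv u₀) Vorbis.L.get32.entry (Vorbis.Spec.get32.spec others frames Blk len))
    (h_store4 : Asan.SmallCheck Lay μ Vorbis.WayInv (Vorbis.CodeOK u₀) [.rax, .rcx, .rdx] 4 Vorbis.L.__asan_store4_noabort.entry)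
    (g : Ghost) (A : Arena × List Obj) (v : State) (hm : SegMid u₀ g A pcC4 1 v) :
    ReachVia Lay μ WayInv v (fun w => SegMid u₀ g A pcC5 2 w ∨ SegMid u₀ g A pcS5 0 w) := by
  have he := hm.entry
  v_entry he
  simp only [depth] at he_room he_stack
  -- the present state under the walker's names (and a copy the walker does not consume)
  have w_rip := hm.rip
  have w_rsp := hm.rsp
  have hv_rsp := hm.rsp
  have w_rbp := hm.rbp
  have hv_rbp := hm.rbp
  have w_eq : Mem.EqOn Vorbis.L.textLo Vorbis.L.textHi u₀.mem v.mem := hm.mm.code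
  have hdf : v.flags .df = false := (show abiInv _ from hm.inv).1
  have hmx : v.mxcsr &&& 0x1F80 = 0x1F80 := (show abiInv _ from hm.inv).2
  have hsse := Vorbis.sseOK_of_abiInv hm.inv
  -- where `*f` is: for the side goals of the stores
  have hf1 : 0x119d40 ≤ (g.e.reg .rdi).toNat := hm.pos.flo
  have hf2 : (g.e.reg .rdi).toNat + 1808 ≤ 0xC00000 := hm.pos.fhi
  have hget32 := h_get32 A.2 g.frames' (g.Blk A) g.len
  u_walk hcode [hμ.vendor] until [pcC5, pcS5] span [Vorbis.L.textLo, Vorbis.L.textHi] side (v_side)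
  · v_inv
  · exact hm.readerPre _ w_mem w_rsp w_rdi
  · v_after_call w_rsp_113c7d w_mem_113c7d
    have hpost : Get32Post (g.Blk A) g.len (s_113c7d.reg .rdi).toNat s_113c7d s_113c7dr := w_post
    rw [w_rdi_113c7d] at hpost
    simp only [w_rdi_113c7d] at w_same
    have hsame : Mem.SameExcept [⟨(g.e.reg .rsp).toNat - 1888, (g.e.reg .rsp).toNat - 1480⟩,
        ⟨(g.e.reg .rdi).toNat + 48, (g.e.reg .rdi).toNat + 56⟩, ⟨(g.e.reg .rdi).toNat + 136, (g.e.reg .rdi).toNat + 144⟩,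
        ⟨(g.e.reg .rsp).toNat - 1320, (g.e.reg .rsp).toNat - 1314⟩] v.mem s_113c7dr.mem := by
      u_same
    have hbits : Bits (g.Blk A) g.len s_113c7dr.mem g.f := hpost.reader.bits
    have hrbp : s_113c7dr.reg .rbp = g.e.reg .rdi := by
      rw [w_kept .rbp rfl]
      exact hv_rbp
    have hmr : SegMid u₀ g A _ 1 s_113c7dr := hm.after w_rip w_rsp hrbp w_inv hsame (callee_std hm.pos) hbits
    obtain ⟨z, w_rax⟩ : ∃ z, s_113c7dr.reg .rax = z := ⟨_, rfl⟩
    have w_rbp := hrbp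
    u_walk hcode [hμ.vendor] until [pcC5, pcS5] span [Vorbis.L.textLo, Vorbis.L.textHi] side (v_side)
    · -- the check of `f->sample_rate = …` (0x113c88): a field of the live object `*f`
      have hs2 : Mem.SameExcept [⟨(g.e.reg .rsp).toNat - 1888, (g.e.reg .rsp).toNat - 1480⟩,
        ⟨(g.e.reg .rdi).toNat + 48, (g.e.reg .rdi).toNat + 56⟩, ⟨(g.e.reg .rdi).toNat + 136, (g.e.reg .rdi).toNat + 144⟩,
        ⟨(g.e.reg .rsp).toNat - 1320, (g.e.reg .rsp).toNat - 1314⟩,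
        ⟨(g.e.reg .rdi).toNat, (g.e.reg .rdi).toNat + 8⟩, ⟨(g.e.reg .rdi).toNat + 152, (g.e.reg .rdi).toNat + 160⟩] v.mem s_113c88.mem := by
        u_same
      exact hm.check4 hs2 (allowed_std hm.pos) _ 0 rfl (by omega)
    · -- sample_rate = 0: the error stub of line 3648
      have hs2 : Mem.SameExcept [⟨(g.e.reg .rsp).toNat - 1888, (g.e.reg .rsp).toNat - 1480⟩,
        ⟨(g.e.reg .rdi).toNat + 48, (g.e.reg .rdi).toNat + 56⟩, ⟨(g.e.reg .rdi).toNat + 136, (g.e.reg .rdi).toNat + 144⟩,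
        ⟨(g.e.reg .rsp).toNat - 1320, (g.e.reg .rsp).toNat - 1314⟩,
        ⟨(g.e.reg .rdi).toNat, (g.e.reg .rdi).toNat + 8⟩, ⟨(g.e.reg .rdi).toNat + 152, (g.e.reg .rdi).toNat + 160⟩] v.mem s_113c94.mem := by
        u_same
      have hs3 : Mem.SameExcept [⟨(g.e.reg .rsp).toNat - 1888, (g.e.reg .rsp).toNat - 1480⟩,
        ⟨(g.e.reg .rdi).toNat, (g.e.reg .rdi).toNat + 8⟩, ⟨(g.e.reg .rdi).toNat + 152, (g.e.reg .rdi).toNat + 160⟩,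
        ⟨(g.e.reg .rdi).toNat + 136, (g.e.reg .rdi).toNat + 144⟩] s_113c7dr.mem s_113c94.mem := by
        clear hs2 hsame
        u_same
      refine ReachVia.done (Or.inr ?_)
      refine hm.afterStore w_rip w_rsp ?_ ?_ hs2 (allowed_std hm.pos) (bits_own hm.pos hbits hs3 (own_std hm.pos)) ?_
      · rw [w_kept .rbp rfl]
        exact hv_rbp
      · v_inv
      · exact Hd.zero _ _
    · -- HD2: sample_rate ≠ 0; HD1 kept
      have hs2 : Mem.SameExcept [⟨(g.e.reg .rsp).toNat - 1888, (g.e.reg .rsp).toNat - 1480⟩,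
        ⟨(g.e.reg .rdi).toNat + 48, (g.e.reg .rdi).toNat + 56⟩, ⟨(g.e.reg .rdi).toNat + 136, (g.e.reg .rdi).toNat + 144⟩,
        ⟨(g.e.reg .rsp).toNat - 1320, (g.e.reg .rsp).toNat - 1314⟩,
        ⟨(g.e.reg .rdi).toNat, (g.e.reg .rdi).toNat + 8⟩, ⟨(g.e.reg .rdi).toNat + 152, (g.e.reg .rdi).toNat + 160⟩] v.mem s_113c94.mem := by
        u_same
      have hs3 : Mem.SameExcept [⟨(g.e.reg .rsp).toNat - 1888, (g.e.reg .rsp).toNat - 1480⟩,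
        ⟨(g.e.reg .rdi).toNat, (g.e.reg .rdi).toNat + 8⟩, ⟨(g.e.reg .rdi).toNat + 152, (g.e.reg .rdi).toNat + 160⟩,
        ⟨(g.e.reg .rdi).toNat + 136, (g.e.reg .rdi).toNat + 144⟩] s_113c7dr.mem s_113c94.mem := by
        clear hs2 hsame
        u_same
      refine ReachVia.done (Or.inl ?_)
      refine hm.afterStore w_rip w_rsp ?_ ?_ hs2 (allowed_std hm.pos) (bits_own hm.pos hbits hs3 (own_std hm.pos)) ?_
      · rw [w_kept .rbp rfl]
        exact hv_rbp
      · v_inv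
      · have hs4 : Mem.SameExcept [⟨(g.e.reg .rsp).toNat - 1888, (g.e.reg .rsp).toNat - 1480⟩,
            ⟨(g.e.reg .rdi).toNat, (g.e.reg .rdi).toNat + 4⟩] s_113c7dr.mem s_113c94.mem := by
          clear hs2 hs3 hsame
          u_same
        have e0 : g.e.reg .rdi = addr g.f := (addr_f g).symm
        have hsr : stb_vorbis.sample_rate s_113c94.mem g.f = (Word.part Width.w32 z).toNat := by
          rw [w_mem, e0]
          simp only [vacc, voff, Nat.add_zero]
          rw [Mem.u32_writeLE_same]
          exact Nat.mod_eq_of_lt (Word.part Width.w32 z).isLt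
        refine ⟨fun _ => keep_chan hm.pos hmr.hd hs4, fun _ => ?_, fun h3 => absurd h3 (by omega)⟩
        rw [hsr]
        exact hbr_113c94

/-- **0x113c9a, line 3649** `get32(f);` — the result is dropped; the call returns to the next cut point. -/
theorem chunk5 (Lay : Layout) (hLay : Lay.hi = 0x1000000) (μ : Microarch) (hμ : UserX.MicroOK μ) (u₀ : State)
    (hcode : HasCodeNat Lay u₀ Vorbis.L.start_decoder.entry Vorbis.Code.code_start_decoder.nat Vorbis.L.start_decoder.size)
    (h_get32 : ∀ (others : List Obj) (frames : List (Nat × FrameLayout)) (Blk : Block → Prop) (len : Nat), Calls Lay μ Vorbis.WayInv (Vorbis.conv u₀) Vorbis.L.get32.entry (Vorbis.Spec.get32.spec others frames Blk len))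
    (g : Ghost) (A : Arena × List Obj) (k : Nat) (v : State) (hm : SegMid u₀ g A pcC5 k v) :
    ReachVia Lay μ WayInv v (fun w => SegMid u₀ g A Vorbis.L.start_decoder.cut20 k w) := by
  have he := hm.entry
  v_entry he
  simp only [depth] at he_room he_stack
  -- the present state under the walker's names (and a copy the walker does not consume)
  have w_rip := hm.rip
  have w_rsp := hm.rsp
  have hv_rsp := hm.rsp
  have w_rbp := hm.rbp
  have hv_rbp := hm.rbp
  have w_eq : Mem.EqOn Vorbis.L.textLo Vorbis.L.textHi u₀.mem v.mem := hm.mm.code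
  have hdf : v.flags .df = false := (show abiInv _ from hm.inv).1
  have hmx : v.mxcsr &&& 0x1F80 = 0x1F80 := (show abiInv _ from hm.inv).2
  have hsse := Vorbis.sseOK_of_abiInv hm.inv
  -- where `*f` is: for the side goals of the stores
  have hf1 : 0x119d40 ≤ (g.e.reg .rdi).toNat := hm.pos.flo
  have hf2 : (g.e.reg .rdi).toNat + 1808 ≤ 0xC00000 := hm.pos.fhi
  have hget32 := h_get32 A.2 g.frames' (g.Blk A) g.len
  u_walk hcode [hμ.vendor] until [Vorbis.L.start_decoder.cut20] span [Vorbis.L.textLo, Vorbis.L.textHi] side (v_side)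
  · v_inv
  · exact hm.readerPre _ w_mem w_rsp w_rdi
  · v_after_call w_rsp_113c9d w_mem_113c9d
    have hpost : Get32Post (g.Blk A) g.len (s_113c9d.reg .rdi).toNat s_113c9d s_113c9dr := w_post
    rw [w_rdi_113c9d] at hpost
    simp only [w_rdi_113c9d] at w_same
    have hsame : Mem.SameExcept [⟨(g.e.reg .rsp).toNat - 1888, (g.e.reg .rsp).toNat - 1480⟩,
        ⟨(g.e.reg .rdi).toNat + 48, (g.e.reg .rdi).toNat + 56⟩, ⟨(g.e.reg .rdi).toNat + 136, (g.e.reg .rdi).toNat + 144⟩,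
        ⟨(g.e.reg .rsp).toNat - 1320, (g.e.reg .rsp).toNat - 1314⟩] v.mem s_113c9dr.mem := by
      u_same
    have hbits : Bits (g.Blk A) g.len s_113c9dr.mem g.f := hpost.reader.bits
    have hrbp : s_113c9dr.reg .rbp = g.e.reg .rdi := by
      rw [w_kept .rbp rfl]
      exact hv_rbp
    refine ReachVia.done ?_
    exact hm.after w_rip w_rsp hrbp w_inv hsame (callee_std hm.pos) hbits

/-- **0x113ca2, line 3650** `get32(f);` — the result is dropped; the call returns to the next cut point. -/
theorem chunk6 (Lay : Layout) (hLay : Lay.hi = 0x1000000) (μ : Microarch) (hμ : UserX.MicroOK μ) (u₀ : State)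
    (hcode : HasCodeNat Lay u₀ Vorbis.L.start_decoder.entry Vorbis.Code.code_start_decoder.nat Vorbis.L.start_decoder.size)
    (h_get32 : ∀ (others : List Obj) (frames : List (Nat × FrameLayout)) (Blk : Block → Prop) (len : Nat), Calls Lay μ Vorbis.WayInv (Vorbis.conv u₀) Vorbis.L.get32.entry (Vorbis.Spec.get32.spec others frames Blk len))
    (g : Ghost) (A : Arena × List Obj) (k : Nat) (v : State) (hm : SegMid u₀ g A Vorbis.L.start_decoder.cut20 k v) :
    ReachVia Lay μ WayInv v (fun w => SegMid u₀ g A Vorbis.L.start_decoder.cut21 k w) := by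
  have he := hm.entry
  v_entry he
  simp only [depth] at he_room he_stack
  -- the present state under the walker's names (and a copy the walker does not consume)
  have w_rip := hm.rip
  have w_rsp := hm.rsp
  have hv_rsp := hm.rsp
  have w_rbp := hm.rbp
  have hv_rbp := hm.rbp
  have w_eq : Mem.EqOn Vorbis.L.textLo Vorbis.L.textHi u₀.mem v.mem := hm.mm.code
  have hdf : v.flags .df = false := (show abiInv _ from hm.inv).1
  have hmx : v.mxcsr &&& 0x1F80 = 0x1F80 := (show abiInv _ from hm.inv).2
  have hsse := Vorbis.sseOK_of_abiInv hm.inv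
  -- where `*f` is: for the side goals of the stores
  have hf1 : 0x119d40 ≤ (g.e.reg .rdi).toNat := hm.pos.flo
  have hf2 : (g.e.reg .rdi).toNat + 1808 ≤ 0xC00000 := hm.pos.fhi
  have hget32 := h_get32 A.2 g.frames' (g.Blk A) g.len
  u_walk hcode [hμ.vendor] until [Vorbis.L.start_decoder.cut21] span [Vorbis.L.textLo, Vorbis.L.textHi] side (v_side)
  · v_inv
  · exact hm.readerPre _ w_mem w_rsp w_rdi
  · v_after_call w_rsp_113ca5 w_mem_113ca5
    have hpost : Get32Post (g.Blk A) g.len (s_113ca5.reg .rdi).toNat s_113ca5 s_113ca5r := w_post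
    rw [w_rdi_113ca5] at hpost
    simp only [w_rdi_113ca5] at w_same
    have hsame : Mem.SameExcept [⟨(g.e.reg .rsp).toNat - 1888, (g.e.reg .rsp).toNat - 1480⟩,
        ⟨(g.e.reg .rdi).toNat + 48, (g.e.reg .rdi).toNat + 56⟩, ⟨(g.e.reg .rdi).toNat + 136, (g.e.reg .rdi).toNat + 144⟩,
        ⟨(g.e.reg .rsp).toNat - 1320, (g.e.reg .rsp).toNat - 1314⟩] v.mem s_113ca5r.mem := by
      u_same
    have hbits : Bits (g.Blk A) g.len s_113ca5r.mem g.f := hpost.reader.bits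
    have hrbp : s_113ca5r.reg .rbp = g.e.reg .rdi := by
      rw [w_kept .rbp rfl]
      exact hv_rbp
    refine ReachVia.done ?_
    exact hm.after w_rip w_rsp hrbp w_inv hsame (callee_std hm.pos) hbits

/-- **0x113caa, line 3651** `get32(f);` — the result is dropped; the call returns to the next cut point. -/
theorem chunk7 (Lay : Layout) (hLay : Lay.hi = 0x1000000) (μ : Microarch) (hμ : UserX.MicroOK μ) (u₀ : State)
    (hcode : HasCodeNat Lay u₀ Vorbis.L.start_decoder.entry Vorbis.Code.code_start_decoder.nat Vorbis.L.start_decoder.size)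
    (h_get32 : ∀ (others : List Obj) (frames : List (Nat × FrameLayout)) (Blk : Block → Prop) (len : Nat), Calls Lay μ Vorbis.WayInv (Vorbis.conv u₀) Vorbis.L.get32.entry (Vorbis.Spec.get32.spec others frames Blk len))
    (g : Ghost) (A : Arena × List Obj) (k : Nat) (v : State) (hm : SegMid u₀ g A Vorbis.L.start_decoder.cut21 k v) :
    ReachVia Lay μ WayInv v (fun w => SegMid u₀ g A Vorbis.L.start_decoder.cut22 k w) := by
  have he := hm.entry
  v_entry he
  simp only [depth] at he_room he_stack
  -- the present state under the walker's names (and a copy the walker does not consume)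
  have w_rip := hm.rip
  have w_rsp := hm.rsp
  have hv_rsp := hm.rsp
  have w_rbp := hm.rbp
  have hv_rbp := hm.rbp
  have w_eq : Mem.EqOn Vorbis.L.textLo Vorbis.L.textHi u₀.mem v.mem := hm.mm.code
  have hdf : v.flags .df = false := (show abiInv _ from hm.inv).1
  have hmx : v.mxcsr &&& 0x1F80 = 0x1F80 := (show abiInv _ from hm.inv).2
  have hsse := Vorbis.sseOK_of_abiInv hm.inv
  -- where `*f` is: for the side goals of the stores
  have hf1 : 0x119d40 ≤ (g.e.reg .rdi).toNat := hm.pos.flo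
  have hf2 : (g.e.reg .rdi).toNat + 1808 ≤ 0xC00000 := hm.pos.fhi
  have hget32 := h_get32 A.2 g.frames' (g.Blk A) g.len
  u_walk hcode [hμ.vendor] until [Vorbis.L.start_decoder.cut22] span [Vorbis.L.textLo, Vorbis.L.textHi] side (v_side)
  · v_inv
  · exact hm.readerPre _ w_mem w_rsp w_rdi
  · v_after_call w_rsp_113cad w_mem_113cad
    have hpost : Get32Post (g.Blk A) g.len (s_113cad.reg .rdi).toNat s_113cad s_113cadr := w_post
    rw [w_rdi_113cad] at hpost
    simp only [w_rdi_113cad] at w_same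
    have hsame : Mem.SameExcept [⟨(g.e.reg .rsp).toNat - 1888, (g.e.reg .rsp).toNat - 1480⟩,
        ⟨(g.e.reg .rdi).toNat + 48, (g.e.reg .rdi).toNat + 56⟩, ⟨(g.e.reg .rdi).toNat + 136, (g.e.reg .rdi).toNat + 144⟩,
        ⟨(g.e.reg .rsp).toNat - 1320, (g.e.reg .rsp).toNat - 1314⟩] v.mem s_113cadr.mem := by
      u_same
    have hbits : Bits (g.Blk A) g.len s_113cadr.mem g.f := hpost.reader.bits
    have hrbp : s_113cadr.reg .rbp = g.e.reg .rdi := by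
      rw [w_kept .rbp rfl]
      exact hv_rbp
    refine ReachVia.done ?_
    exact hm.after w_rip w_rsp hrbp w_inv hsame (callee_std hm.pos) hbits

/-- **0x113cb2 – 0x113d29** (lines 3652 – 3661 `x = get8(f); log0 = x & 15; log1 = x >> 4; f->blocksize_0 = 1 << log0; f->blocksize_1 = 1 << log1;` and the three range tests): both stores come BEFORE the tests; HD3 on the fall-through, HD1 / HD2 kept. -/
theorem chunk8 (Lay : Layout) (hLay : Lay.hi = 0x1000000) (μ : Microarch) (hμ : UserX.MicroOK μ) (u₀ : State)
    (hcode : HasCodeNat Lay u₀ Vorbis.L.start_decoder.entry Vorbis.Code.code_start_decoder.nat Vorbis.L.start_decoder.size)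
    (h_get8 : ∀ (others : List Obj) (frames : List (Nat × FrameLayout)) (Blk : Block → Prop) (len : Nat), Calls Lay μ Vorbis.WayInv (Vorbis.conv u₀) Vorbis.L.get8.entry (Vorbis.Spec.get8.spec others frames Blk len))
    (h_store4 : Asan.SmallCheck Lay μ Vorbis.WayInv (Vorbis.CodeOK u₀) [.rax, .rcx, .rdx] 4 Vorbis.L.__asan_store4_noabort.entry)
    (g : Ghost) (A : Arena × List Obj) (v : State) (hm : SegMid u₀ g A Vorbis.L.start_decoder.cut22 2 v) :
    ReachVia Lay μ WayInv v (fun w => SegMid u₀ g A pcC9 3 w ∨ SegMid u₀ g A pcS6 0 w ∨ SegMid u₀ g A pcS7 0 w ∨ SegMid u₀ g A pcS8 0 w) := by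
  have he := hm.entry
  v_entry he
  simp only [depth] at he_room he_stack
  -- the present state under the walker's names (and a copy the walker does not consume)
  have w_rip := hm.rip
  have w_rsp := hm.rsp
  have hv_rsp := hm.rsp
  have w_rbp := hm.rbp
  have hv_rbp := hm.rbp
  have w_eq : Mem.EqOn Vorbis.L.textLo Vorbis.L.textHi u₀.mem v.mem := hm.mm.code
  have hdf : v.flags .df = false := (show abiInv _ from hm.inv).1
  have hmx : v.mxcsr &&& 0x1F80 = 0x1F80 := (show abiInv _ from hm.inv).2
  have hsse := Vorbis.sseOK_of_abiInv hm.inv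
  -- where `*f` is: for the side goals of the stores
  have hf1 : 0x119d40 ≤ (g.e.reg .rdi).toNat := hm.pos.flo
  have hf2 : (g.e.reg .rdi).toNat + 1808 ≤ 0xC00000 := hm.pos.fhi
  have hget8 := h_get8 A.2 g.frames' (g.Blk A) g.len
  u_walk hcode [hμ.vendor] until [pcC9, pcS6, pcS7, pcS8] span [Vorbis.L.textLo, Vorbis.L.textHi] side (v_side)
  · v_inv
  · exact hm.readerPre _ w_mem w_rsp w_rdi
  · v_after_call w_rsp_113cb5 w_mem_113cb5
    have hpost : Get8Post (g.Blk A) g.len (s_113cb5.reg .rdi).toNat s_113cb5 s_113cb5r := w_post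
    rw [w_rdi_113cb5] at hpost
    simp only [w_rdi_113cb5] at w_same
    have hsame : Mem.SameExcept [⟨(g.e.reg .rsp).toNat - 1888, (g.e.reg .rsp).toNat - 1480⟩,
        ⟨(g.e.reg .rdi).toNat + 48, (g.e.reg .rdi).toNat + 56⟩, ⟨(g.e.reg .rdi).toNat + 136, (g.e.reg .rdi).toNat + 144⟩,
        ⟨(g.e.reg .rsp).toNat - 1320, (g.e.reg .rsp).toNat - 1314⟩] v.mem s_113cb5r.mem := by
      u_same
    have hbits : Bits (g.Blk A) g.len s_113cb5r.mem g.f := hpost.reader.bits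
    have hrbp : s_113cb5r.reg .rbp = g.e.reg .rdi := by
      rw [w_kept .rbp rfl]
      exact hv_rbp
    have hmr : SegMid u₀ g A _ 2 s_113cb5r := hm.after w_rip w_rsp hrbp w_inv hsame (callee_std hm.pos) hbits
    obtain ⟨z, w_rax⟩ : ∃ z, s_113cb5r.reg .rax = z := ⟨_, rfl⟩
    have w_rbp := hrbp
    u_walk hcode [hμ.vendor] until [pcC9, pcS6, pcS7, pcS8] span [Vorbis.L.textLo, Vorbis.L.textHi] side (v_side)
    · -- the check of `f->blocksize_0 = …` (0x113ce2): a field of the live object `*f`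
      have hs2 : Mem.SameExcept [⟨(g.e.reg .rsp).toNat - 1888, (g.e.reg .rsp).toNat - 1480⟩,
        ⟨(g.e.reg .rdi).toNat + 48, (g.e.reg .rdi).toNat + 56⟩, ⟨(g.e.reg .rdi).toNat + 136, (g.e.reg .rdi).toNat + 144⟩,
        ⟨(g.e.reg .rsp).toNat - 1320, (g.e.reg .rsp).toNat - 1314⟩,
        ⟨(g.e.reg .rdi).toNat, (g.e.reg .rdi).toNat + 8⟩, ⟨(g.e.reg .rdi).toNat + 152, (g.e.reg .rdi).toNat + 160⟩] v.mem s_113ce2.mem := by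
        u_same
      refine hm.check4 hs2 (allowed_std hm.pos) _ 152 ?_ (by omega)
      show (g.e.reg .rdi + 152).toNat = (g.e.reg .rdi).toNat + 152
      u_omega
    · -- the check of `f->blocksize_1 = …` (0x113cfe): a field of the live object `*f`
      have hs2 : Mem.SameExcept [⟨(g.e.reg .rsp).toNat - 1888, (g.e.reg .rsp).toNat - 1480⟩,
        ⟨(g.e.reg .rdi).toNat + 48, (g.e.reg .rdi).toNat + 56⟩, ⟨(g.e.reg .rdi).toNat + 136, (g.e.reg .rdi).toNat + 144⟩,
        ⟨(g.e.reg .rsp).toNat - 1320, (g.e.reg .rsp).toNat - 1314⟩,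
        ⟨(g.e.reg .rdi).toNat, (g.e.reg .rdi).toNat + 8⟩, ⟨(g.e.reg .rdi).toNat + 152, (g.e.reg .rdi).toNat + 160⟩] v.mem s_113cfe.mem := by
        u_same
      refine hm.check4 hs2 (allowed_std hm.pos) _ 156 ?_ (by omega)
      show (g.e.reg .rdi + 156).toNat = (g.e.reg .rdi).toNat + 156
      u_omega
    · -- log0 outside [6, 13]: the error stub of line 3659
      have hs2 : Mem.SameExcept [⟨(g.e.reg .rsp).toNat - 1888, (g.e.reg .rsp).toNat - 1480⟩,
        ⟨(g.e.reg .rdi).toNat + 48, (g.e.reg .rdi).toNat + 56⟩, ⟨(g.e.reg .rdi).toNat + 136, (g.e.reg .rdi).toNat + 144⟩,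
        ⟨(g.e.reg .rsp).toNat - 1320, (g.e.reg .rsp).toNat - 1314⟩,
        ⟨(g.e.reg .rdi).toNat, (g.e.reg .rdi).toNat + 8⟩, ⟨(g.e.reg .rdi).toNat + 152, (g.e.reg .rdi).toNat + 160⟩] v.mem s_113d10.mem := by
        u_same
      have hs3 : Mem.SameExcept [⟨(g.e.reg .rsp).toNat - 1888, (g.e.reg .rsp).toNat - 1480⟩,
        ⟨(g.e.reg .rdi).toNat, (g.e.reg .rdi).toNat + 8⟩, ⟨(g.e.reg .rdi).toNat + 152, (g.e.reg .rdi).toNat + 160⟩,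
        ⟨(g.e.reg .rdi).toNat + 136, (g.e.reg .rdi).toNat + 144⟩] s_113cb5r.mem s_113d10.mem := by
        clear hs2 hsame
        u_same
      refine ReachVia.done (Or.inr (Or.inl ?_))
      refine hm.afterStore w_rip w_rsp ?_ ?_ hs2 (allowed_std hm.pos) (bits_own hm.pos hbits hs3 (own_std hm.pos)) ?_
      · rw [w_kept .rbp rfl]
        exact hv_rbp
      · v_inv
      · exact Hd.zero _ _
    · -- log1 outside [6, 13]: the error stub of line 3660
      have hs2 : Mem.SameExcept [⟨(g.e.reg .rsp).toNat - 1888, (g.e.reg .rsp).toNat - 1480⟩,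
        ⟨(g.e.reg .rdi).toNat + 48, (g.e.reg .rdi).toNat + 56⟩, ⟨(g.e.reg .rdi).toNat + 136, (g.e.reg .rdi).toNat + 144⟩,
        ⟨(g.e.reg .rsp).toNat - 1320, (g.e.reg .rsp).toNat - 1314⟩,
        ⟨(g.e.reg .rdi).toNat, (g.e.reg .rdi).toNat + 8⟩, ⟨(g.e.reg .rdi).toNat + 152, (g.e.reg .rdi).toNat + 160⟩] v.mem s_113d20.mem := by
        u_same
      have hs3 : Mem.SameExcept [⟨(g.e.reg .rsp).toNat - 1888, (g.e.reg .rsp).toNat - 1480⟩,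
        ⟨(g.e.reg .rdi).toNat, (g.e.reg .rdi).toNat + 8⟩, ⟨(g.e.reg .rdi).toNat + 152, (g.e.reg .rdi).toNat + 160⟩,
        ⟨(g.e.reg .rdi).toNat + 136, (g.e.reg .rdi).toNat + 144⟩] s_113cb5r.mem s_113d20.mem := by
        clear hs2 hsame
        u_same
      refine ReachVia.done (Or.inr (Or.inr (Or.inl ?_)))
      refine hm.afterStore w_rip w_rsp ?_ ?_ hs2 (allowed_std hm.pos) (bits_own hm.pos hbits hs3 (own_std hm.pos)) ?_
      · rw [w_kept .rbp rfl]
        exact hv_rbp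
      · v_inv
      · exact Hd.zero _ _
    · -- log0 > log1: the error stub of line 3661
      have hs2 : Mem.SameExcept [⟨(g.e.reg .rsp).toNat - 1888, (g.e.reg .rsp).toNat - 1480⟩,
        ⟨(g.e.reg .rdi).toNat + 48, (g.e.reg .rdi).toNat + 56⟩, ⟨(g.e.reg .rdi).toNat + 136, (g.e.reg .rdi).toNat + 144⟩,
        ⟨(g.e.reg .rsp).toNat - 1320, (g.e.reg .rsp).toNat - 1314⟩,
        ⟨(g.e.reg .rdi).toNat, (g.e.reg .rdi).toNat + 8⟩, ⟨(g.e.reg .rdi).toNat + 152, (g.e.reg .rdi).toNat + 160⟩] v.mem s_113d29.mem := by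
        u_same
      have hs3 : Mem.SameExcept [⟨(g.e.reg .rsp).toNat - 1888, (g.e.reg .rsp).toNat - 1480⟩,
        ⟨(g.e.reg .rdi).toNat, (g.e.reg .rdi).toNat + 8⟩, ⟨(g.e.reg .rdi).toNat + 152, (g.e.reg .rdi).toNat + 160⟩,
        ⟨(g.e.reg .rdi).toNat + 136, (g.e.reg .rdi).toNat + 144⟩] s_113cb5r.mem s_113d29.mem := by
        clear hs2 hsame
        u_same
      refine ReachVia.done (Or.inr (Or.inr (Or.inr ?_)))
      refine hm.afterStore w_rip w_rsp ?_ ?_ hs2 (allowed_std hm.pos) (bits_own hm.pos hbits hs3 (own_std hm.pos)) ?_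
      · rw [w_kept .rbp rfl]
        exact hv_rbp
      · v_inv
      · exact Hd.zero _ _
    · -- HD3; HD1, HD2 kept
      have hs2 : Mem.SameExcept [⟨(g.e.reg .rsp).toNat - 1888, (g.e.reg .rsp).toNat - 1480⟩,
        ⟨(g.e.reg .rdi).toNat + 48, (g.e.reg .rdi).toNat + 56⟩, ⟨(g.e.reg .rdi).toNat + 136, (g.e.reg .rdi).toNat + 144⟩,
        ⟨(g.e.reg .rsp).toNat - 1320, (g.e.reg .rsp).toNat - 1314⟩,
        ⟨(g.e.reg .rdi).toNat, (g.e.reg .rdi).toNat + 8⟩, ⟨(g.e.reg .rdi).toNat + 152, (g.e.reg .rdi).toNat + 160⟩] v.mem s_113d29.mem := by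
        u_same
      have hs3 : Mem.SameExcept [⟨(g.e.reg .rsp).toNat - 1888, (g.e.reg .rsp).toNat - 1480⟩,
        ⟨(g.e.reg .rdi).toNat, (g.e.reg .rdi).toNat + 8⟩, ⟨(g.e.reg .rdi).toNat + 152, (g.e.reg .rdi).toNat + 160⟩,
        ⟨(g.e.reg .rdi).toNat + 136, (g.e.reg .rdi).toNat + 144⟩] s_113cb5r.mem s_113d29.mem := by
        clear hs2 hsame
        u_same
      refine ReachVia.done (Or.inl ?_)
      refine hm.afterStore w_rip w_rsp ?_ ?_ hs2 (allowed_std hm.pos) (bits_own hm.pos hbits hs3 (own_std hm.pos)) ?_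
      · rw [w_kept .rbp rfl]
        exact hv_rbp
      · v_inv
      · have hs4 : Mem.SameExcept [⟨(g.e.reg .rsp).toNat - 1888, (g.e.reg .rsp).toNat - 1480⟩,
            ⟨(g.e.reg .rdi).toNat + 152, (g.e.reg .rdi).toNat + 160⟩] s_113cb5r.mem s_113d29.mem := by
          clear hs2 hs3 hsame
          u_same
        obtain ⟨k12, k2⟩ := keep_hd2 hm.pos hmr.hd hs4
        have r0 : s_113d29.mem.readLE (g.e.reg .rdi + 152) 4 = (1#32 <<< ((BitVec.setWidth 8 (Word.part Width.w32 z &&& 15#32)).toNat % 32)).toNat := by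
          have hf3 : (g.e.reg .rsp).toNat + 8 ≤ (g.e.reg .rdi).toNat ∨ (g.e.reg .rdi).toNat + 1808 ≤ 0x700000 ∨
              0x800000 ≤ (g.e.reg .rdi).toNat := hm.pos.foff
          rw [w_mem]
          u_read
        have r1 : s_113d29.mem.readLE (g.e.reg .rdi + 156) 4 = (1#32 <<< ((BitVec.setWidth 8 (Word.part Width.w32 (Word.writePart Width.w8 (Word.ofBV (Word.part Width.w32 z)) (BitVec.setWidth 8 (Word.part Width.w32 z) >>> 4)))).toNat % 32)).toNat := by
          rw [w_mem]
          u_read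
        obtain ⟨a, b, h6, hab, h13, e0, e1⟩ := hd3_bits (Word.part Width.w32 z) hbr_113d10 hbr_113d20 hbr_113d29
        refine ⟨fun _ => k12, fun _ => k2, fun _ => ⟨a, b, h6, hab, h13, ?_, ?_⟩⟩
        · rw [← e0]
          simp only [vacc, voff]
          apply i32_of_readLE
          rw [← addr_field hm.pos 152 (by omega)]
          exact r0
        · rw [← e1]
          simp only [vacc, voff]
          apply i32_of_readLE
          rw [← addr_field hm.pos 156 (by omega)]
          exact r1

/-- **0x113d2f – 0x113d39** (lines 3665 – 3666 `x = get8(f); if (!(x & 1)) return error(…)`): the segment's exit to `.4`. -/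
theorem chunk9 (Lay : Layout) (hLay : Lay.hi = 0x1000000) (μ : Microarch) (hμ : UserX.MicroOK μ) (u₀ : State)
    (hcode : HasCodeNat Lay u₀ Vorbis.L.start_decoder.entry Vorbis.Code.code_start_decoder.nat Vorbis.L.start_decoder.size)
    (h_get8 : ∀ (others : List Obj) (frames : List (Nat × FrameLayout)) (Blk : Block → Prop) (len : Nat), Calls Lay μ Vorbis.WayInv (Vorbis.conv u₀) Vorbis.L.get8.entry (Vorbis.Spec.get8.spec others frames Blk len))
    (g : Ghost) (A : Arena × List Obj) (k : Nat) (v : State) (hm : SegMid u₀ g A pcC9 k v) :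
    ReachVia Lay μ WayInv v (fun w => SegMid u₀ g A pc_4 k w ∨ SegMid u₀ g A pcS9 k w) := by
  have he := hm.entry
  v_entry he
  simp only [depth] at he_room he_stack
  -- the present state under the walker's names (and a copy the walker does not consume)
  have w_rip := hm.rip
  have w_rsp := hm.rsp
  have hv_rsp := hm.rsp
  have w_rbp := hm.rbp
  have hv_rbp := hm.rbp
  have w_eq : Mem.EqOn Vorbis.L.textLo Vorbis.L.textHi u₀.mem v.mem := hm.mm.code
  have hdf : v.flags .df = false := (show abiInv _ from hm.inv).1
  have hmx : v.mxcsr &&& 0x1F80 = 0x1F80 := (show abiInv _ from hm.inv).2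
  have hsse := Vorbis.sseOK_of_abiInv hm.inv
  -- where `*f` is: for the side goals of the stores
  have hf1 : 0x119d40 ≤ (g.e.reg .rdi).toNat := hm.pos.flo
  have hf2 : (g.e.reg .rdi).toNat + 1808 ≤ 0xC00000 := hm.pos.fhi
  have hget8 := h_get8 A.2 g.frames' (g.Blk A) g.len
  u_walk hcode [hμ.vendor] until [pc_4, pcS9] span [Vorbis.L.textLo, Vorbis.L.textHi] side (v_side)
  · v_inv
  · exact hm.readerPre _ w_mem w_rsp w_rdi
  · v_after_call w_rsp_113d32 w_mem_113d32
    have hpost : Get8Post (g.Blk A) g.len (s_113d32.reg .rdi).toNat s_113d32 s_113d32r := w_post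
    rw [w_rdi_113d32] at hpost
    simp only [w_rdi_113d32] at w_same
    have hsame : Mem.SameExcept [⟨(g.e.reg .rsp).toNat - 1888, (g.e.reg .rsp).toNat - 1480⟩,
        ⟨(g.e.reg .rdi).toNat + 48, (g.e.reg .rdi).toNat + 56⟩, ⟨(g.e.reg .rdi).toNat + 136, (g.e.reg .rdi).toNat + 144⟩,
        ⟨(g.e.reg .rsp).toNat - 1320, (g.e.reg .rsp).toNat - 1314⟩] v.mem s_113d32r.mem := by
      u_same
    have hbits : Bits (g.Blk A) g.len s_113d32r.mem g.f := hpost.reader.bits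
    have hrbp : s_113d32r.reg .rbp = g.e.reg .rdi := by
      rw [w_kept .rbp rfl]
      exact hv_rbp
    obtain ⟨z, w_rax⟩ : ∃ z, s_113d32r.reg .rax = z := ⟨_, rfl⟩
    have w_rbp := hrbp
    u_walk hcode [hμ.vendor] until [pc_4, pcS9] span [Vorbis.L.textLo, Vorbis.L.textHi] side (v_side)
    · -- the framing bit is clear: the error stub of line 3666
      refine ReachVia.done (Or.inr ?_)
      refine hm.after w_rip w_rsp ?_ ?_ (w_mem ▸ hsame) (callee_std hm.pos) (w_mem ▸ hbits)
      · rw [w_kept .rbp rfl]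
        exact hv_rbp
      · v_inv
    · -- on to line 3669
      refine ReachVia.done (Or.inl ?_)
      refine hm.after w_rip w_rsp ?_ ?_ (w_mem ▸ hsame) (callee_std hm.pos) (w_mem ▸ hbits)
      · rw [w_kept .rbp rfl]
        exact hv_rbp
      · v_inv

/-- **stub 0, 0x113d8b, line 3642**: `mov esi, e ; mov rdi, rbp ; call error ; jmp 113b22` — `error` stores `f->error` only and returns 0: SD.ERR at the common epilogue. -/
theorem stub0 (Lay : Layout) (hLay : Lay.hi = 0x1000000) (μ : Microarch) (hμ : UserX.MicroOK μ) (u₀ : State)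
    (hcode : HasCodeNat Lay u₀ Vorbis.L.start_decoder.entry Vorbis.Code.code_start_decoder.nat Vorbis.L.start_decoder.size)
    (h_error : ∀ (others : List Obj) (frames : List (Nat × FrameLayout)), Calls Lay μ Vorbis.WayInv (Vorbis.conv u₀) Vorbis.L.error.entry (Vorbis.Spec.error.spec others frames))
    (g : Ghost) (A : Arena × List Obj) (k : Nat) (v : State) (hm : SegMid u₀ g A pcS0 k v) :
    ReachVia Lay μ WayInv v (fun w => AtERR u₀ g w) := by
  have he := hm.entry
  v_entry he
  simp only [depth] at he_room he_stack
  -- the present state under the walker's names (and a copy the walker does not consume)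
  have w_rip := hm.rip
  have w_rsp := hm.rsp
  have hv_rsp := hm.rsp
  have w_rbp := hm.rbp
  have hv_rbp := hm.rbp
  have w_eq : Mem.EqOn Vorbis.L.textLo Vorbis.L.textHi u₀.mem v.mem := hm.mm.code
  have hdf : v.flags .df = false := (show abiInv _ from hm.inv).1
  have hmx : v.mxcsr &&& 0x1F80 = 0x1F80 := (show abiInv _ from hm.inv).2
  have hsse := Vorbis.sseOK_of_abiInv hm.inv
  -- where `*f` is: for the side goals of the stores
  have hf1 : 0x119d40 ≤ (g.e.reg .rdi).toNat := hm.pos.flo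
  have hf2 : (g.e.reg .rdi).toNat + 1808 ≤ 0xC00000 := hm.pos.fhi
  have herror := h_error A.2 g.frames'
  u_walk hcode [hμ.vendor] until [pc_ERR] span [Vorbis.L.textLo, Vorbis.L.textHi] side (v_side)
  · v_inv
  · exact ⟨hm.shadowPre _ w_mem w_rsp, by rw [w_rdi]; exact hm.hand.obj.mono (sub_frames' g A)⟩
  · v_after_call w_rsp_113d93 w_mem_113d93
    simp only [w_rdi_113d93] at w_same
    have hsame : Mem.SameExcept [⟨(g.e.reg .rsp).toNat - 1888, (g.e.reg .rsp).toNat - 1480⟩,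
        ⟨(g.e.reg .rdi).toNat + 48, (g.e.reg .rdi).toNat + 56⟩, ⟨(g.e.reg .rdi).toNat + 136, (g.e.reg .rdi).toNat + 144⟩,
        ⟨(g.e.reg .rsp).toNat - 1320, (g.e.reg .rsp).toNat - 1314⟩] v.mem s_113d93r.mem := by
      u_same
    have hsame2 : Mem.SameExcept [⟨(g.e.reg .rsp).toNat - 1888, (g.e.reg .rsp).toNat - 1480⟩,
        ⟨(g.e.reg .rdi).toNat, (g.e.reg .rdi).toNat + 8⟩, ⟨(g.e.reg .rdi).toNat + 152, (g.e.reg .rdi).toNat + 160⟩,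
        ⟨(g.e.reg .rdi).toNat + 136, (g.e.reg .rdi).toNat + 144⟩] v.mem s_113d93r.mem := by
      clear hsame
      u_same
    have hbits : Bits (g.Blk A) g.len s_113d93r.mem g.f := bits_own hm.pos hm.mm.sd.bits hsame2 (own_std hm.pos)
    have hrbp : s_113d93r.reg .rbp = g.e.reg .rdi := by
      rw [w_kept .rbp rfl]
      exact hv_rbp
    have w_rax : s_113d93r.reg .rax = 0 := w_post.1
    have w_rbp := hrbp
    u_walk hcode [hμ.vendor] until [pc_ERR] span [Vorbis.L.textLo, Vorbis.L.textHi] side (v_side)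
    refine ReachVia.done ?_
    refine (hm.after w_rip w_rsp ?_ ?_ (w_mem ▸ hsame) (callee_std hm.pos) (w_mem ▸ hbits)).atErr ?_
    · rw [w_kept .rbp rfl]
      exact hv_rbp
    · v_inv
    · rw [w_rax]
      rfl

/-- **stub 1, 0x113d9d, line 3643**: `mov esi, e ; mov rdi, rbp ; call error ; jmp 113b22` — `error` stores `f->error` only and returns 0: SD.ERR at the common epilogue. -/
theorem stub1 (Lay : Layout) (hLay : Lay.hi = 0x1000000) (μ : Microarch) (hμ : UserX.MicroOK μ) (u₀ : State)
    (hcode : HasCodeNat Lay u₀ Vorbis.L.start_decoder.entry Vorbis.Code.code_start_decoder.nat Vorbis.L.start_decoder.size)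
    (h_error : ∀ (others : List Obj) (frames : List (Nat × FrameLayout)), Calls Lay μ Vorbis.WayInv (Vorbis.conv u₀) Vorbis.L.error.entry (Vorbis.Spec.error.spec others frames))
    (g : Ghost) (A : Arena × List Obj) (k : Nat) (v : State) (hm : SegMid u₀ g A pcS1 k v) :
    ReachVia Lay μ WayInv v (fun w => AtERR u₀ g w) := by
  have he := hm.entry
  v_entry he
  simp only [depth] at he_room he_stack
  -- the present state under the walker's names (and a copy the walker does not consume)
  have w_rip := hm.rip
  have w_rsp := hm.rsp
  have hv_rsp := hm.rsp
  have w_rbp := hm.rbp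
  have hv_rbp := hm.rbp
  have w_eq : Mem.EqOn Vorbis.L.textLo Vorbis.L.textHi u₀.mem v.mem := hm.mm.code
  have hdf : v.flags .df = false := (show abiInv _ from hm.inv).1
  have hmx : v.mxcsr &&& 0x1F80 = 0x1F80 := (show abiInv _ from hm.inv).2
  have hsse := Vorbis.sseOK_of_abiInv hm.inv
  -- where `*f` is: for the side goals of the stores
  have hf1 : 0x119d40 ≤ (g.e.reg .rdi).toNat := hm.pos.flo
  have hf2 : (g.e.reg .rdi).toNat + 1808 ≤ 0xC00000 := hm.pos.fhi
  have herror := h_error A.2 g.frames'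
  u_walk hcode [hμ.vendor] until [pc_ERR] span [Vorbis.L.textLo, Vorbis.L.textHi] side (v_side)
  · v_inv
  · exact ⟨hm.shadowPre _ w_mem w_rsp, by rw [w_rdi]; exact hm.hand.obj.mono (sub_frames' g A)⟩
  · v_after_call w_rsp_113da5 w_mem_113da5
    simp only [w_rdi_113da5] at w_same
    have hsame : Mem.SameExcept [⟨(g.e.reg .rsp).toNat - 1888, (g.e.reg .rsp).toNat - 1480⟩,
        ⟨(g.e.reg .rdi).toNat + 48, (g.e.reg .rdi).toNat + 56⟩, ⟨(g.e.reg .rdi).toNat + 136, (g.e.reg .rdi).toNat + 144⟩,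
        ⟨(g.e.reg .rsp).toNat - 1320, (g.e.reg .rsp).toNat - 1314⟩] v.mem s_113da5r.mem := by
      u_same
    have hsame2 : Mem.SameExcept [⟨(g.e.reg .rsp).toNat - 1888, (g.e.reg .rsp).toNat - 1480⟩,
        ⟨(g.e.reg .rdi).toNat, (g.e.reg .rdi).toNat + 8⟩, ⟨(g.e.reg .rdi).toNat + 152, (g.e.reg .rdi).toNat + 160⟩,
        ⟨(g.e.reg .rdi).toNat + 136, (g.e.reg .rdi).toNat + 144⟩] v.mem s_113da5r.mem := by
      clear hsame
      u_same
    have hbits : Bits (g.Blk A) g.len s_113da5r.mem g.f := bits_own hm.pos hm.mm.sd.bits hsame2 (own_std hm.pos)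
    have hrbp : s_113da5r.reg .rbp = g.e.reg .rdi := by
      rw [w_kept .rbp rfl]
      exact hv_rbp
    have w_rax : s_113da5r.reg .rax = 0 := w_post.1
    have w_rbp := hrbp
    u_walk hcode [hμ.vendor] until [pc_ERR] span [Vorbis.L.textLo, Vorbis.L.textHi] side (v_side)
    refine ReachVia.done ?_
    refine (hm.after w_rip w_rsp ?_ ?_ (w_mem ▸ hsame) (callee_std hm.pos) (w_mem ▸ hbits)).atErr ?_
    · rw [w_kept .rbp rfl]
      exact hv_rbp
    · v_inv
    · rw [w_rax]
      rfl

/-- **stub 2, 0x113daf, line 3645**: `mov esi, e ; mov rdi, rbp ; call error ; jmp 113b22` — `error` stores `f->error` only and returns 0: SD.ERR at the common epilogue. -/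
theorem stub2 (Lay : Layout) (hLay : Lay.hi = 0x1000000) (μ : Microarch) (hμ : UserX.MicroOK μ) (u₀ : State)
    (hcode : HasCodeNat Lay u₀ Vorbis.L.start_decoder.entry Vorbis.Code.code_start_decoder.nat Vorbis.L.start_decoder.size)
    (h_error : ∀ (others : List Obj) (frames : List (Nat × FrameLayout)), Calls Lay μ Vorbis.WayInv (Vorbis.conv u₀) Vorbis.L.error.entry (Vorbis.Spec.error.spec others frames))
    (g : Ghost) (A : Arena × List Obj) (k : Nat) (v : State) (hm : SegMid u₀ g A pcS2 k v) :
    ReachVia Lay μ WayInv v (fun w => AtERR u₀ g w) := by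
  have he := hm.entry
  v_entry he
  simp only [depth] at he_room he_stack
  -- the present state under the walker's names (and a copy the walker does not consume)
  have w_rip := hm.rip
  have w_rsp := hm.rsp
  have hv_rsp := hm.rsp
  have w_rbp := hm.rbp
  have hv_rbp := hm.rbp
  have w_eq : Mem.EqOn Vorbis.L.textLo Vorbis.L.textHi u₀.mem v.mem := hm.mm.code
  have hdf : v.flags .df = false := (show abiInv _ from hm.inv).1
  have hmx : v.mxcsr &&& 0x1F80 = 0x1F80 := (show abiInv _ from hm.inv).2
  have hsse := Vorbis.sseOK_of_abiInv hm.inv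
  -- where `*f` is: for the side goals of the stores
  have hf1 : 0x119d40 ≤ (g.e.reg .rdi).toNat := hm.pos.flo
  have hf2 : (g.e.reg .rdi).toNat + 1808 ≤ 0xC00000 := hm.pos.fhi
  have herror := h_error A.2 g.frames'
  u_walk hcode [hμ.vendor] until [pc_ERR] span [Vorbis.L.textLo, Vorbis.L.textHi] side (v_side)
  · v_inv
  · exact ⟨hm.shadowPre _ w_mem w_rsp, by rw [w_rdi]; exact hm.hand.obj.mono (sub_frames' g A)⟩
  · v_after_call w_rsp_113db7 w_mem_113db7
    simp only [w_rdi_113db7] at w_same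
    have hsame : Mem.SameExcept [⟨(g.e.reg .rsp).toNat - 1888, (g.e.reg .rsp).toNat - 1480⟩,
        ⟨(g.e.reg .rdi).toNat + 48, (g.e.reg .rdi).toNat + 56⟩, ⟨(g.e.reg .rdi).toNat + 136, (g.e.reg .rdi).toNat + 144⟩,
        ⟨(g.e.reg .rsp).toNat - 1320, (g.e.reg .rsp).toNat - 1314⟩] v.mem s_113db7r.mem := by
      u_same
    have hsame2 : Mem.SameExcept [⟨(g.e.reg .rsp).toNat - 1888, (g.e.reg .rsp).toNat - 1480⟩,
        ⟨(g.e.reg .rdi).toNat, (g.e.reg .rdi).toNat + 8⟩, ⟨(g.e.reg .rdi).toNat + 152, (g.e.reg .rdi).toNat + 160⟩,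
        ⟨(g.e.reg .rdi).toNat + 136, (g.e.reg .rdi).toNat + 144⟩] v.mem s_113db7r.mem := by
      clear hsame
      u_same
    have hbits : Bits (g.Blk A) g.len s_113db7r.mem g.f := bits_own hm.pos hm.mm.sd.bits hsame2 (own_std hm.pos)
    have hrbp : s_113db7r.reg .rbp = g.e.reg .rdi := by
      rw [w_kept .rbp rfl]
      exact hv_rbp
    have w_rax : s_113db7r.reg .rax = 0 := w_post.1
    have w_rbp := hrbp
    u_walk hcode [hμ.vendor] until [pc_ERR] span [Vorbis.L.textLo, Vorbis.L.textHi] side (v_side)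
    refine ReachVia.done ?_
    refine (hm.after w_rip w_rsp ?_ ?_ (w_mem ▸ hsame) (callee_std hm.pos) (w_mem ▸ hbits)).atErr ?_
    · rw [w_kept .rbp rfl]
      exact hv_rbp
    · v_inv
    · rw [w_rax]
      rfl

/-- **stub 3, 0x113dc1, line 3646**: `mov esi, e ; mov rdi, rbp ; call error ; jmp 113b22` — `error` stores `f->error` only and returns 0: SD.ERR at the common epilogue. -/
theorem stub3 (Lay : Layout) (hLay : Lay.hi = 0x1000000) (μ : Microarch) (hμ : UserX.MicroOK μ) (u₀ : State)
    (hcode : HasCodeNat Lay u₀ Vorbis.L.start_decoder.entry Vorbis.Code.code_start_decoder.nat Vorbis.L.start_decoder.size)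
    (h_error : ∀ (others : List Obj) (frames : List (Nat × FrameLayout)), Calls Lay μ Vorbis.WayInv (Vorbis.conv u₀) Vorbis.L.error.entry (Vorbis.Spec.error.spec others frames))
    (g : Ghost) (A : Arena × List Obj) (k : Nat) (v : State) (hm : SegMid u₀ g A pcS3 k v) :
    ReachVia Lay μ WayInv v (fun w => AtERR u₀ g w) := by
  have he := hm.entry
  v_entry he
  simp only [depth] at he_room he_stack
  -- the present state under the walker's names (and a copy the walker does not consume)
  have w_rip := hm.rip
  have w_rsp := hm.rsp
  have hv_rsp := hm.rsp
  have w_rbp := hm.rbp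
  have hv_rbp := hm.rbp
  have w_eq : Mem.EqOn Vorbis.L.textLo Vorbis.L.textHi u₀.mem v.mem := hm.mm.code
  have hdf : v.flags .df = false := (show abiInv _ from hm.inv).1
  have hmx : v.mxcsr &&& 0x1F80 = 0x1F80 := (show abiInv _ from hm.inv).2
  have hsse := Vorbis.sseOK_of_abiInv hm.inv
  -- where `*f` is: for the side goals of the stores
  have hf1 : 0x119d40 ≤ (g.e.reg .rdi).toNat := hm.pos.flo
  have hf2 : (g.e.reg .rdi).toNat + 1808 ≤ 0xC00000 := hm.pos.fhi
  have herror := h_error A.2 g.frames'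
  u_walk hcode [hμ.vendor] until [pc_ERR] span [Vorbis.L.textLo, Vorbis.L.textHi] side (v_side)
  · v_inv
  · exact ⟨hm.shadowPre _ w_mem w_rsp, by rw [w_rdi]; exact hm.hand.obj.mono (sub_frames' g A)⟩
  · v_after_call w_rsp_113dc9 w_mem_113dc9
    simp only [w_rdi_113dc9] at w_same
    have hsame : Mem.SameExcept [⟨(g.e.reg .rsp).toNat - 1888, (g.e.reg .rsp).toNat - 1480⟩,
        ⟨(g.e.reg .rdi).toNat + 48, (g.e.reg .rdi).toNat + 56⟩, ⟨(g.e.reg .rdi).toNat + 136, (g.e.reg .rdi).toNat + 144⟩,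
        ⟨(g.e.reg .rsp).toNat - 1320, (g.e.reg .rsp).toNat - 1314⟩] v.mem s_113dc9r.mem := by
      u_same
    have hsame2 : Mem.SameExcept [⟨(g.e.reg .rsp).toNat - 1888, (g.e.reg .rsp).toNat - 1480⟩,
        ⟨(g.e.reg .rdi).toNat, (g.e.reg .rdi).toNat + 8⟩, ⟨(g.e.reg .rdi).toNat + 152, (g.e.reg .rdi).toNat + 160⟩,
        ⟨(g.e.reg .rdi).toNat + 136, (g.e.reg .rdi).toNat + 144⟩] v.mem s_113dc9r.mem := by
      clear hsame
      u_same
    have hbits : Bits (g.Blk A) g.len s_113dc9r.mem g.f := bits_own hm.pos hm.mm.sd.bits hsame2 (own_std hm.pos)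
    have hrbp : s_113dc9r.reg .rbp = g.e.reg .rdi := by
      rw [w_kept .rbp rfl]
      exact hv_rbp
    have w_rax : s_113dc9r.reg .rax = 0 := w_post.1
    have w_rbp := hrbp
    u_walk hcode [hμ.vendor] until [pc_ERR] span [Vorbis.L.textLo, Vorbis.L.textHi] side (v_side)
    refine ReachVia.done ?_
    refine (hm.after w_rip w_rsp ?_ ?_ (w_mem ▸ hsame) (callee_std hm.pos) (w_mem ▸ hbits)).atErr ?_
    · rw [w_kept .rbp rfl]
      exact hv_rbp
    · v_inv
    · rw [w_rax]
      rfl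

/-- **stub 4, 0x113dd3, line 3647**: `mov esi, e ; mov rdi, rbp ; call error ; jmp 113b22` — `error` stores `f->error` only and returns 0: SD.ERR at the common epilogue. -/
theorem stub4 (Lay : Layout) (hLay : Lay.hi = 0x1000000) (μ : Microarch) (hμ : UserX.MicroOK μ) (u₀ : State)
    (hcode : HasCodeNat Lay u₀ Vorbis.L.start_decoder.entry Vorbis.Code.code_start_decoder.nat Vorbis.L.start_decoder.size)
    (h_error : ∀ (others : List Obj) (frames : List (Nat × FrameLayout)), Calls Lay μ Vorbis.WayInv (Vorbis.conv u₀) Vorbis.L.error.entry (Vorbis.Spec.error.spec others frames))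
    (g : Ghost) (A : Arena × List Obj) (k : Nat) (v : State) (hm : SegMid u₀ g A pcS4 k v) :
    ReachVia Lay μ WayInv v (fun w => AtERR u₀ g w) := by
  have he := hm.entry
  v_entry he
  simp only [depth] at he_room he_stack
  -- the present state under the walker's names (and a copy the walker does not consume)
  have w_rip := hm.rip
  have w_rsp := hm.rsp
  have hv_rsp := hm.rsp
  have w_rbp := hm.rbp
  have hv_rbp := hm.rbp
  have w_eq : Mem.EqOn Vorbis.L.textLo Vorbis.L.textHi u₀.mem v.mem := hm.mm.code
  have hdf : v.flags .df = false := (show abiInv _ from hm.inv).1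
  have hmx : v.mxcsr &&& 0x1F80 = 0x1F80 := (show abiInv _ from hm.inv).2
  have hsse := Vorbis.sseOK_of_abiInv hm.inv
  -- where `*f` is: for the side goals of the stores
  have hf1 : 0x119d40 ≤ (g.e.reg .rdi).toNat := hm.pos.flo
  have hf2 : (g.e.reg .rdi).toNat + 1808 ≤ 0xC00000 := hm.pos.fhi
  have herror := h_error A.2 g.frames'
  u_walk hcode [hμ.vendor] until [pc_ERR] span [Vorbis.L.textLo, Vorbis.L.textHi] side (v_side)
  · v_inv
  · exact ⟨hm.shadowPre _ w_mem w_rsp, by rw [w_rdi]; exact hm.hand.obj.mono (sub_frames' g A)⟩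
  · v_after_call w_rsp_113ddb w_mem_113ddb
    simp only [w_rdi_113ddb] at w_same
    have hsame : Mem.SameExcept [⟨(g.e.reg .rsp).toNat - 1888, (g.e.reg .rsp).toNat - 1480⟩,
        ⟨(g.e.reg .rdi).toNat + 48, (g.e.reg .rdi).toNat + 56⟩, ⟨(g.e.reg .rdi).toNat + 136, (g.e.reg .rdi).toNat + 144⟩,
        ⟨(g.e.reg .rsp).toNat - 1320, (g.e.reg .rsp).toNat - 1314⟩] v.mem s_113ddbr.mem := by
      u_same
    have hsame2 : Mem.SameExcept [⟨(g.e.reg .rsp).toNat - 1888, (g.e.reg .rsp).toNat - 1480⟩,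
        ⟨(g.e.reg .rdi).toNat, (g.e.reg .rdi).toNat + 8⟩, ⟨(g.e.reg .rdi).toNat + 152, (g.e.reg .rdi).toNat + 160⟩,
        ⟨(g.e.reg .rdi).toNat + 136, (g.e.reg .rdi).toNat + 144⟩] v.mem s_113ddbr.mem := by
      clear hsame
      u_same
    have hbits : Bits (g.Blk A) g.len s_113ddbr.mem g.f := bits_own hm.pos hm.mm.sd.bits hsame2 (own_std hm.pos)
    have hrbp : s_113ddbr.reg .rbp = g.e.reg .rdi := by
      rw [w_kept .rbp rfl]
      exact hv_rbp
    have w_rax : s_113ddbr.reg .rax = 0 := w_post.1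
    have w_rbp := hrbp
    u_walk hcode [hμ.vendor] until [pc_ERR] span [Vorbis.L.textLo, Vorbis.L.textHi] side (v_side)
    refine ReachVia.done ?_
    refine (hm.after w_rip w_rsp ?_ ?_ (w_mem ▸ hsame) (callee_std hm.pos) (w_mem ▸ hbits)).atErr ?_
    · rw [w_kept .rbp rfl]
      exact hv_rbp
    · v_inv
    · rw [w_rax]
      rfl

/-- **stub 5, 0x113de5, line 3648**: `mov esi, e ; mov rdi, rbp ; call error ; jmp 113b22` — `error` stores `f->error` only and returns 0: SD.ERR at the common epilogue. -/
theorem stub5 (Lay : Layout) (hLay : Lay.hi = 0x1000000) (μ : Microarch) (hμ : UserX.MicroOK μ) (u₀ : State)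
    (hcode : HasCodeNat Lay u₀ Vorbis.L.start_decoder.entry Vorbis.Code.code_start_decoder.nat Vorbis.L.start_decoder.size)
    (h_error : ∀ (others : List Obj) (frames : List (Nat × FrameLayout)), Calls Lay μ Vorbis.WayInv (Vorbis.conv u₀) Vorbis.L.error.entry (Vorbis.Spec.error.spec others frames))
    (g : Ghost) (A : Arena × List Obj) (k : Nat) (v : State) (hm : SegMid u₀ g A pcS5 k v) :
    ReachVia Lay μ WayInv v (fun w => AtERR u₀ g w) := by
  have he := hm.entry
  v_entry he
  simp only [depth] at he_room he_stack
  -- the present state under the walker's names (and a copy the walker does not consume)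
  have w_rip := hm.rip
  have w_rsp := hm.rsp
  have hv_rsp := hm.rsp
  have w_rbp := hm.rbp
  have hv_rbp := hm.rbp
  have w_eq : Mem.EqOn Vorbis.L.textLo Vorbis.L.textHi u₀.mem v.mem := hm.mm.code
  have hdf : v.flags .df = false := (show abiInv _ from hm.inv).1
  have hmx : v.mxcsr &&& 0x1F80 = 0x1F80 := (show abiInv _ from hm.inv).2
  have hsse := Vorbis.sseOK_of_abiInv hm.inv
  -- where `*f` is: for the side goals of the stores
  have hf1 : 0x119d40 ≤ (g.e.reg .rdi).toNat := hm.pos.flo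
  have hf2 : (g.e.reg .rdi).toNat + 1808 ≤ 0xC00000 := hm.pos.fhi
  have herror := h_error A.2 g.frames'
  u_walk hcode [hμ.vendor] until [pc_ERR] span [Vorbis.L.textLo, Vorbis.L.textHi] side (v_side)
  · v_inv
  · exact ⟨hm.shadowPre _ w_mem w_rsp, by rw [w_rdi]; exact hm.hand.obj.mono (sub_frames' g A)⟩
  · v_after_call w_rsp_113ded w_mem_113ded
    simp only [w_rdi_113ded] at w_same
    have hsame : Mem.SameExcept [⟨(g.e.reg .rsp).toNat - 1888, (g.e.reg .rsp).toNat - 1480⟩,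
        ⟨(g.e.reg .rdi).toNat + 48, (g.e.reg .rdi).toNat + 56⟩, ⟨(g.e.reg .rdi).toNat + 136, (g.e.reg .rdi).toNat + 144⟩,
        ⟨(g.e.reg .rsp).toNat - 1320, (g.e.reg .rsp).toNat - 1314⟩] v.mem s_113dedr.mem := by
      u_same
    have hsame2 : Mem.SameExcept [⟨(g.e.reg .rsp).toNat - 1888, (g.e.reg .rsp).toNat - 1480⟩,
        ⟨(g.e.reg .rdi).toNat, (g.e.reg .rdi).toNat + 8⟩, ⟨(g.e.reg .rdi).toNat + 152, (g.e.reg .rdi).toNat + 160⟩,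
        ⟨(g.e.reg .rdi).toNat + 136, (g.e.reg .rdi).toNat + 144⟩] v.mem s_113dedr.mem := by
      clear hsame
      u_same
    have hbits : Bits (g.Blk A) g.len s_113dedr.mem g.f := bits_own hm.pos hm.mm.sd.bits hsame2 (own_std hm.pos)
    have hrbp : s_113dedr.reg .rbp = g.e.reg .rdi := by
      rw [w_kept .rbp rfl]
      exact hv_rbp
    have w_rax : s_113dedr.reg .rax = 0 := w_post.1
    have w_rbp := hrbp
    u_walk hcode [hμ.vendor] until [pc_ERR] span [Vorbis.L.textLo, Vorbis.L.textHi] side (v_side)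
    refine ReachVia.done ?_
    refine (hm.after w_rip w_rsp ?_ ?_ (w_mem ▸ hsame) (callee_std hm.pos) (w_mem ▸ hbits)).atErr ?_
    · rw [w_kept .rbp rfl]
      exact hv_rbp
    · v_inv
    · rw [w_rax]
      rfl

/-- **stub 6, 0x113df7, line 3659**: `mov esi, e ; mov rdi, rbp ; call error ; jmp 113b22` — `error` stores `f->error` only and returns 0: SD.ERR at the common epilogue. -/
theorem stub6 (Lay : Layout) (hLay : Lay.hi = 0x1000000) (μ : Microarch) (hμ : UserX.MicroOK μ) (u₀ : State)
    (hcode : HasCodeNat Lay u₀ Vorbis.L.start_decoder.entry Vorbis.Code.code_start_decoder.nat Vorbis.L.start_decoder.size)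
    (h_error : ∀ (others : List Obj) (frames : List (Nat × FrameLayout)), Calls Lay μ Vorbis.WayInv (Vorbis.conv u₀) Vorbis.L.error.entry (Vorbis.Spec.error.spec others frames))
    (g : Ghost) (A : Arena × List Obj) (k : Nat) (v : State) (hm : SegMid u₀ g A pcS6 k v) :
    ReachVia Lay μ WayInv v (fun w => AtERR u₀ g w) := by
  have he := hm.entry
  v_entry he
  simp only [depth] at he_room he_stack
  -- the present state under the walker's names (and a copy the walker does not consume)
  have w_rip := hm.rip
  have w_rsp := hm.rsp
  have hv_rsp := hm.rsp
  have w_rbp := hm.rbp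
  have hv_rbp := hm.rbp
  have w_eq : Mem.EqOn Vorbis.L.textLo Vorbis.L.textHi u₀.mem v.mem := hm.mm.code
  have hdf : v.flags .df = false := (show abiInv _ from hm.inv).1
  have hmx : v.mxcsr &&& 0x1F80 = 0x1F80 := (show abiInv _ from hm.inv).2
  have hsse := Vorbis.sseOK_of_abiInv hm.inv
  -- where `*f` is: for the side goals of the stores
  have hf1 : 0x119d40 ≤ (g.e.reg .rdi).toNat := hm.pos.flo
  have hf2 : (g.e.reg .rdi).toNat + 1808 ≤ 0xC00000 := hm.pos.fhi
  have herror := h_error A.2 g.frames'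
  u_walk hcode [hμ.vendor] until [pc_ERR] span [Vorbis.L.textLo, Vorbis.L.textHi] side (v_side)
  · v_inv
  · exact ⟨hm.shadowPre _ w_mem w_rsp, by rw [w_rdi]; exact hm.hand.obj.mono (sub_frames' g A)⟩
  · v_after_call w_rsp_113dff w_mem_113dff
    simp only [w_rdi_113dff] at w_same
    have hsame : Mem.SameExcept [⟨(g.e.reg .rsp).toNat - 1888, (g.e.reg .rsp).toNat - 1480⟩,
        ⟨(g.e.reg .rdi).toNat + 48, (g.e.reg .rdi).toNat + 56⟩, ⟨(g.e.reg .rdi).toNat + 136, (g.e.reg .rdi).toNat + 144⟩,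
        ⟨(g.e.reg .rsp).toNat - 1320, (g.e.reg .rsp).toNat - 1314⟩] v.mem s_113dffr.mem := by
      u_same
    have hsame2 : Mem.SameExcept [⟨(g.e.reg .rsp).toNat - 1888, (g.e.reg .rsp).toNat - 1480⟩,
        ⟨(g.e.reg .rdi).toNat, (g.e.reg .rdi).toNat + 8⟩, ⟨(g.e.reg .rdi).toNat + 152, (g.e.reg .rdi).toNat + 160⟩,
        ⟨(g.e.reg .rdi).toNat + 136, (g.e.reg .rdi).toNat + 144⟩] v.mem s_113dffr.mem := by
      clear hsame
      u_same
    have hbits : Bits (g.Blk A) g.len s_113dffr.mem g.f := bits_own hm.pos hm.mm.sd.bits hsame2 (own_std hm.pos)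
    have hrbp : s_113dffr.reg .rbp = g.e.reg .rdi := by
      rw [w_kept .rbp rfl]
      exact hv_rbp
    have w_rax : s_113dffr.reg .rax = 0 := w_post.1
    have w_rbp := hrbp
    u_walk hcode [hμ.vendor] until [pc_ERR] span [Vorbis.L.textLo, Vorbis.L.textHi] side (v_side)
    refine ReachVia.done ?_
    refine (hm.after w_rip w_rsp ?_ ?_ (w_mem ▸ hsame) (callee_std hm.pos) (w_mem ▸ hbits)).atErr ?_
    · rw [w_kept .rbp rfl]
      exact hv_rbp
    · v_inv
    · rw [w_rax]
      rfl

/-- **stub 7, 0x113e09, line 3660**: `mov esi, e ; mov rdi, rbp ; call error ; jmp 113b22` — `error` stores `f->error` only and returns 0: SD.ERR at the common epilogue. -/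
theorem stub7 (Lay : Layout) (hLay : Lay.hi = 0x1000000) (μ : Microarch) (hμ : UserX.MicroOK μ) (u₀ : State)
    (hcode : HasCodeNat Lay u₀ Vorbis.L.start_decoder.entry Vorbis.Code.code_start_decoder.nat Vorbis.L.start_decoder.size)
    (h_error : ∀ (others : List Obj) (frames : List (Nat × FrameLayout)), Calls Lay μ Vorbis.WayInv (Vorbis.conv u₀) Vorbis.L.error.entry (Vorbis.Spec.error.spec others frames))
    (g : Ghost) (A : Arena × List Obj) (k : Nat) (v : State) (hm : SegMid u₀ g A pcS7 k v) :
    ReachVia Lay μ WayInv v (fun w => AtERR u₀ g w) := by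
  have he := hm.entry
  v_entry he
  simp only [depth] at he_room he_stack
  -- the present state under the walker's names (and a copy the walker does not consume)
  have w_rip := hm.rip
  have w_rsp := hm.rsp
  have hv_rsp := hm.rsp
  have w_rbp := hm.rbp
  have hv_rbp := hm.rbp
  have w_eq : Mem.EqOn Vorbis.L.textLo Vorbis.L.textHi u₀.mem v.mem := hm.mm.code
  have hdf : v.flags .df = false := (show abiInv _ from hm.inv).1
  have hmx : v.mxcsr &&& 0x1F80 = 0x1F80 := (show abiInv _ from hm.inv).2
  have hsse := Vorbis.sseOK_of_abiInv hm.inv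
  -- where `*f` is: for the side goals of the stores
  have hf1 : 0x119d40 ≤ (g.e.reg .rdi).toNat := hm.pos.flo
  have hf2 : (g.e.reg .rdi).toNat + 1808 ≤ 0xC00000 := hm.pos.fhi
  have herror := h_error A.2 g.frames'
  u_walk hcode [hμ.vendor] until [pc_ERR] span [Vorbis.L.textLo, Vorbis.L.textHi] side (v_side)
  · v_inv
  · exact ⟨hm.shadowPre _ w_mem w_rsp, by rw [w_rdi]; exact hm.hand.obj.mono (sub_frames' g A)⟩
  · v_after_call w_rsp_113e11 w_mem_113e11
    simp only [w_rdi_113e11] at w_same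
    have hsame : Mem.SameExcept [⟨(g.e.reg .rsp).toNat - 1888, (g.e.reg .rsp).toNat - 1480⟩,
        ⟨(g.e.reg .rdi).toNat + 48, (g.e.reg .rdi).toNat + 56⟩, ⟨(g.e.reg .rdi).toNat + 136, (g.e.reg .rdi).toNat + 144⟩,
        ⟨(g.e.reg .rsp).toNat - 1320, (g.e.reg .rsp).toNat - 1314⟩] v.mem s_113e11r.mem := by
      u_same
    have hsame2 : Mem.SameExcept [⟨(g.e.reg .rsp).toNat - 1888, (g.e.reg .rsp).toNat - 1480⟩,
        ⟨(g.e.reg .rdi).toNat, (g.e.reg .rdi).toNat + 8⟩, ⟨(g.e.reg .rdi).toNat + 152, (g.e.reg .rdi).toNat + 160⟩,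
        ⟨(g.e.reg .rdi).toNat + 136, (g.e.reg .rdi).toNat + 144⟩] v.mem s_113e11r.mem := by
      clear hsame
      u_same
    have hbits : Bits (g.Blk A) g.len s_113e11r.mem g.f := bits_own hm.pos hm.mm.sd.bits hsame2 (own_std hm.pos)
    have hrbp : s_113e11r.reg .rbp = g.e.reg .rdi := by
      rw [w_kept .rbp rfl]
      exact hv_rbp
    have w_rax : s_113e11r.reg .rax = 0 := w_post.1
    have w_rbp := hrbp
    u_walk hcode [hμ.vendor] until [pc_ERR] span [Vorbis.L.textLo, Vorbis.L.textHi] side (v_side)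
    refine ReachVia.done ?_
    refine (hm.after w_rip w_rsp ?_ ?_ (w_mem ▸ hsame) (callee_std hm.pos) (w_mem ▸ hbits)).atErr ?_
    · rw [w_kept .rbp rfl]
      exact hv_rbp
    · v_inv
    · rw [w_rax]
      rfl

/-- **stub 8, 0x113e1b, line 3661**: `mov esi, e ; mov rdi, rbp ; call error ; jmp 113b22` — `error` stores `f->error` only and returns 0: SD.ERR at the common epilogue. -/
theorem stub8 (Lay : Layout) (hLay : Lay.hi = 0x1000000) (μ : Microarch) (hμ : UserX.MicroOK μ) (u₀ : State)
    (hcode : HasCodeNat Lay u₀ Vorbis.L.start_decoder.entry Vorbis.Code.code_start_decoder.nat Vorbis.L.start_decoder.size)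
    (h_error : ∀ (others : List Obj) (frames : List (Nat × FrameLayout)), Calls Lay μ Vorbis.WayInv (Vorbis.conv u₀) Vorbis.L.error.entry (Vorbis.Spec.error.spec others frames))
    (g : Ghost) (A : Arena × List Obj) (k : Nat) (v : State) (hm : SegMid u₀ g A pcS8 k v) :
    ReachVia Lay μ WayInv v (fun w => AtERR u₀ g w) := by
  have he := hm.entry
  v_entry he
  simp only [depth] at he_room he_stack
  -- the present state under the walker's names (and a copy the walker does not consume)
  have w_rip := hm.rip
  have w_rsp := hm.rsp
  have hv_rsp := hm.rsp
  have w_rbp := hm.rbp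
  have hv_rbp := hm.rbp
  have w_eq : Mem.EqOn Vorbis.L.textLo Vorbis.L.textHi u₀.mem v.mem := hm.mm.code
  have hdf : v.flags .df = false := (show abiInv _ from hm.inv).1
  have hmx : v.mxcsr &&& 0x1F80 = 0x1F80 := (show abiInv _ from hm.inv).2
  have hsse := Vorbis.sseOK_of_abiInv hm.inv
  -- where `*f` is: for the side goals of the stores
  have hf1 : 0x119d40 ≤ (g.e.reg .rdi).toNat := hm.pos.flo
  have hf2 : (g.e.reg .rdi).toNat + 1808 ≤ 0xC00000 := hm.pos.fhi
  have herror := h_error A.2 g.frames'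
  u_walk hcode [hμ.vendor] until [pc_ERR] span [Vorbis.L.textLo, Vorbis.L.textHi] side (v_side)
  · v_inv
  · exact ⟨hm.shadowPre _ w_mem w_rsp, by rw [w_rdi]; exact hm.hand.obj.mono (sub_frames' g A)⟩
  · v_after_call w_rsp_113e23 w_mem_113e23
    simp only [w_rdi_113e23] at w_same
    have hsame : Mem.SameExcept [⟨(g.e.reg .rsp).toNat - 1888, (g.e.reg .rsp).toNat - 1480⟩,
        ⟨(g.e.reg .rdi).toNat + 48, (g.e.reg .rdi).toNat + 56⟩, ⟨(g.e.reg .rdi).toNat + 136, (g.e.reg .rdi).toNat + 144⟩,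
        ⟨(g.e.reg .rsp).toNat - 1320, (g.e.reg .rsp).toNat - 1314⟩] v.mem s_113e23r.mem := by
      u_same
    have hsame2 : Mem.SameExcept [⟨(g.e.reg .rsp).toNat - 1888, (g.e.reg .rsp).toNat - 1480⟩,
        ⟨(g.e.reg .rdi).toNat, (g.e.reg .rdi).toNat + 8⟩, ⟨(g.e.reg .rdi).toNat + 152, (g.e.reg .rdi).toNat + 160⟩,
        ⟨(g.e.reg .rdi).toNat + 136, (g.e.reg .rdi).toNat + 144⟩] v.mem s_113e23r.mem := by
      clear hsame
      u_same
    have hbits : Bits (g.Blk A) g.len s_113e23r.mem g.f := bits_own hm.pos hm.mm.sd.bits hsame2 (own_std hm.pos)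
    have hrbp : s_113e23r.reg .rbp = g.e.reg .rdi := by
      rw [w_kept .rbp rfl]
      exact hv_rbp
    have w_rax : s_113e23r.reg .rax = 0 := w_post.1
    have w_rbp := hrbp
    u_walk hcode [hμ.vendor] until [pc_ERR] span [Vorbis.L.textLo, Vorbis.L.textHi] side (v_side)
    refine ReachVia.done ?_
    refine (hm.after w_rip w_rsp ?_ ?_ (w_mem ▸ hsame) (callee_std hm.pos) (w_mem ▸ hbits)).atErr ?_
    · rw [w_kept .rbp rfl]
      exact hv_rbp
    · v_inv
    · rw [w_rax]
      rfl

/-- **stub 9, 0x113e2d, line 3666**: `mov esi, e ; mov rdi, rbp ; call error ; jmp 113b22` — `error` stores `f->error` only and returns 0: SD.ERR at the common epilogue. -/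
theorem stub9 (Lay : Layout) (hLay : Lay.hi = 0x1000000) (μ : Microarch) (hμ : UserX.MicroOK μ) (u₀ : State)
    (hcode : HasCodeNat Lay u₀ Vorbis.L.start_decoder.entry Vorbis.Code.code_start_decoder.nat Vorbis.L.start_decoder.size)
    (h_error : ∀ (others : List Obj) (frames : List (Nat × FrameLayout)), Calls Lay μ Vorbis.WayInv (Vorbis.conv u₀) Vorbis.L.error.entry (Vorbis.Spec.error.spec others frames))
    (g : Ghost) (A : Arena × List Obj) (k : Nat) (v : State) (hm : SegMid u₀ g A pcS9 k v) :
    ReachVia Lay μ WayInv v (fun w => AtERR u₀ g w) := by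
  have he := hm.entry
  v_entry he
  simp only [depth] at he_room he_stack
  -- the present state under the walker's names (and a copy the walker does not consume)
  have w_rip := hm.rip
  have w_rsp := hm.rsp
  have hv_rsp := hm.rsp
  have w_rbp := hm.rbp
  have hv_rbp := hm.rbp
  have w_eq : Mem.EqOn Vorbis.L.textLo Vorbis.L.textHi u₀.mem v.mem := hm.mm.code
  have hdf : v.flags .df = false := (show abiInv _ from hm.inv).1
  have hmx : v.mxcsr &&& 0x1F80 = 0x1F80 := (show abiInv _ from hm.inv).2
  have hsse := Vorbis.sseOK_of_abiInv hm.inv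
  -- where `*f` is: for the side goals of the stores
  have hf1 : 0x119d40 ≤ (g.e.reg .rdi).toNat := hm.pos.flo
  have hf2 : (g.e.reg .rdi).toNat + 1808 ≤ 0xC00000 := hm.pos.fhi
  have herror := h_error A.2 g.frames'
  u_walk hcode [hμ.vendor] until [pc_ERR] span [Vorbis.L.textLo, Vorbis.L.textHi] side (v_side)
  · v_inv
  · exact ⟨hm.shadowPre _ w_mem w_rsp, by rw [w_rdi]; exact hm.hand.obj.mono (sub_frames' g A)⟩
  · v_after_call w_rsp_113e35 w_mem_113e35
    simp only [w_rdi_113e35] at w_same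
    have hsame : Mem.SameExcept [⟨(g.e.reg .rsp).toNat - 1888, (g.e.reg .rsp).toNat - 1480⟩,
        ⟨(g.e.reg .rdi).toNat + 48, (g.e.reg .rdi).toNat + 56⟩, ⟨(g.e.reg .rdi).toNat + 136, (g.e.reg .rdi).toNat + 144⟩,
        ⟨(g.e.reg .rsp).toNat - 1320, (g.e.reg .rsp).toNat - 1314⟩] v.mem s_113e35r.mem := by
      u_same
    have hsame2 : Mem.SameExcept [⟨(g.e.reg .rsp).toNat - 1888, (g.e.reg .rsp).toNat - 1480⟩,
        ⟨(g.e.reg .rdi).toNat, (g.e.reg .rdi).toNat + 8⟩, ⟨(g.e.reg .rdi).toNat + 152, (g.e.reg .rdi).toNat + 160⟩,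
        ⟨(g.e.reg .rdi).toNat + 136, (g.e.reg .rdi).toNat + 144⟩] v.mem s_113e35r.mem := by
      clear hsame
      u_same
    have hbits : Bits (g.Blk A) g.len s_113e35r.mem g.f := bits_own hm.pos hm.mm.sd.bits hsame2 (own_std hm.pos)
    have hrbp : s_113e35r.reg .rbp = g.e.reg .rdi := by
      rw [w_kept .rbp rfl]
      exact hv_rbp
    have w_rax : s_113e35r.reg .rax = 0 := w_post.1
    have w_rbp := hrbp
    u_walk hcode [hμ.vendor] until [pc_ERR] span [Vorbis.L.textLo, Vorbis.L.textHi] side (v_side)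
    refine ReachVia.done ?_
    refine (hm.after w_rip w_rsp ?_ ?_ (w_mem ▸ hsame) (callee_std hm.pos) (w_mem ▸ hbits)).atErr ?_
    · rw [w_kept .rbp rfl]
      exact hv_rbp
    · v_inv
    · rw [w_rax]
      rfl

/-- The hypotheses of the unit's statement, bundled (so that the chain `onward<k>` does not repeat them). -/
structure Ctx (Lay : Layout) (μ : Microarch) (u₀ : State) : Prop where
  hLay : Lay.hi = 0x1000000
  hμ : UserX.MicroOK μ
  hcode : HasCodeNat Lay u₀ Vorbis.L.start_decoder.entry Vorbis.Code.code_start_decoder.nat Vorbis.L.start_decoder.size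
  h_getn : ∀ (others : List Obj) (frames : List (Nat × FrameLayout)) (Blk : Block → Prop) (len : Nat), Calls Lay μ Vorbis.WayInv (Vorbis.conv u₀) Vorbis.L.getn.entry (Vorbis.Spec.getn.spec others frames Blk len)
  h_validate : ∀ (others : List Obj) (frames : List (Nat × FrameLayout)), Calls Lay μ Vorbis.WayInv (Vorbis.conv u₀) Vorbis.L.vorbis_validate.entry (Vorbis.Spec.vorbis_validate.spec others frames)
  h_get32 : ∀ (others : List Obj) (frames : List (Nat × FrameLayout)) (Blk : Block → Prop) (len : Nat), Calls Lay μ Vorbis.WayInv (Vorbis.conv u₀) Vorbis.L.get32.entry (Vorbis.Spec.get32.spec others frames Blk len)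
  h_get8 : ∀ (others : List Obj) (frames : List (Nat × FrameLayout)) (Blk : Block → Prop) (len : Nat), Calls Lay μ Vorbis.WayInv (Vorbis.conv u₀) Vorbis.L.get8.entry (Vorbis.Spec.get8.spec others frames Blk len)
  h_store4 : Asan.SmallCheck Lay μ Vorbis.WayInv (Vorbis.CodeOK u₀) [.rax, .rcx, .rdx] 4 Vorbis.L.__asan_store4_noabort.entry
  h_error : ∀ (others : List Obj) (frames : List (Nat × FrameLayout)), Calls Lay μ Vorbis.WayInv (Vorbis.conv u₀) Vorbis.L.error.entry (Vorbis.Spec.error.spec others frames)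

/-- From 0x113d2f to the segment's exits. -/
theorem onward9 {Lay : Layout} {μ : Microarch} {u₀ : State} (c : Ctx Lay μ u₀) (g : Ghost) (A : Arena × List Obj) (v : State)
    (hm : SegMid u₀ g A pcC9 3 v) : ReachVia Lay μ WayInv v (fun w => At4 u₀ g w ∨ AtERR u₀ g w) := by
  refine (chunk9 Lay c.hLay μ c.hμ u₀ c.hcode c.h_get8 g A 3 v hm).trans ?_
  intro w hw
  rcases hw with h | h
  · exact ReachVia.done (Or.inl h.at4)
  · exact (stub9 Lay c.hLay μ c.hμ u₀ c.hcode c.h_error g A _ _ h).mono (fun _ hx => Or.inr hx)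
/-- From 0x113cb2 to the segment's exits. -/
theorem onward8 {Lay : Layout} {μ : Microarch} {u₀ : State} (c : Ctx Lay μ u₀) (g : Ghost) (A : Arena × List Obj) (v : State)
    (hm : SegMid u₀ g A Vorbis.L.start_decoder.cut22 2 v) : ReachVia Lay μ WayInv v (fun w => At4 u₀ g w ∨ AtERR u₀ g w) := by
  refine (chunk8 Lay c.hLay μ c.hμ u₀ c.hcode c.h_get8 c.h_store4 g A v hm).trans ?_
  intro w hw
  rcases hw with h | h | h | h
  · exact onward9 c g A w h
  · exact (stub6 Lay c.hLay μ c.hμ u₀ c.hcode c.h_error g A _ _ h).mono (fun _ hx => Or.inr hx)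
  · exact (stub7 Lay c.hLay μ c.hμ u₀ c.hcode c.h_error g A _ _ h).mono (fun _ hx => Or.inr hx)
  · exact (stub8 Lay c.hLay μ c.hμ u₀ c.hcode c.h_error g A _ _ h).mono (fun _ hx => Or.inr hx)
/-- From 0x113caa to the segment's exits. -/
theorem onward7 {Lay : Layout} {μ : Microarch} {u₀ : State} (c : Ctx Lay μ u₀) (g : Ghost) (A : Arena × List Obj) (v : State)
    (hm : SegMid u₀ g A Vorbis.L.start_decoder.cut21 2 v) : ReachVia Lay μ WayInv v (fun w => At4 u₀ g w ∨ AtERR u₀ g w) := by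
  refine (chunk7 Lay c.hLay μ c.hμ u₀ c.hcode c.h_get32 g A 2 v hm).trans ?_
  intro w h
  exact onward8 c g A w h
/-- From 0x113ca2 to the segment's exits. -/
theorem onward6 {Lay : Layout} {μ : Microarch} {u₀ : State} (c : Ctx Lay μ u₀) (g : Ghost) (A : Arena × List Obj) (v : State)
    (hm : SegMid u₀ g A Vorbis.L.start_decoder.cut20 2 v) : ReachVia Lay μ WayInv v (fun w => At4 u₀ g w ∨ AtERR u₀ g w) := by
  refine (chunk6 Lay c.hLay μ c.hμ u₀ c.hcode c.h_get32 g A 2 v hm).trans ?_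
  intro w h
  exact onward7 c g A w h
/-- From 0x113c9a to the segment's exits. -/
theorem onward5 {Lay : Layout} {μ : Microarch} {u₀ : State} (c : Ctx Lay μ u₀) (g : Ghost) (A : Arena × List Obj) (v : State)
    (hm : SegMid u₀ g A pcC5 2 v) : ReachVia Lay μ WayInv v (fun w => At4 u₀ g w ∨ AtERR u₀ g w) := by
  refine (chunk5 Lay c.hLay μ c.hμ u₀ c.hcode c.h_get32 g A 2 v hm).trans ?_
  intro w h
  exact onward6 c g A w h
/-- From 0x113c7a to the segment's exits. -/
theorem onward4 {Lay : Layout} {μ : Microarch} {u₀ : State} (c : Ctx Lay μ u₀) (g : Ghost) (A : Arena × List Obj) (v : State)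
    (hm : SegMid u₀ g A pcC4 1 v) : ReachVia Lay μ WayInv v (fun w => At4 u₀ g w ∨ AtERR u₀ g w) := by
  refine (chunk4 Lay c.hLay μ c.hμ u₀ c.hcode c.h_get32 c.h_store4 g A v hm).trans ?_
  intro w hw
  rcases hw with h | h
  · exact onward5 c g A w h
  · exact (stub5 Lay c.hLay μ c.hμ u₀ c.hcode c.h_error g A _ _ h).mono (fun _ hx => Or.inr hx)
/-- From 0x113c4e to the segment's exits. -/
theorem onward3 {Lay : Layout} {μ : Microarch} {u₀ : State} (c : Ctx Lay μ u₀) (g : Ghost) (A : Arena × List Obj) (v : State)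
    (hm : SegMid u₀ g A pcC3 0 v) : ReachVia Lay μ WayInv v (fun w => At4 u₀ g w ∨ AtERR u₀ g w) := by
  refine (chunk3 Lay c.hLay μ c.hμ u₀ c.hcode c.h_get8 c.h_store4 g A v hm).trans ?_
  intro w hw
  rcases hw with h | h | h
  · exact onward4 c g A w h
  · exact (stub3 Lay c.hLay μ c.hμ u₀ c.hcode c.h_error g A _ _ h).mono (fun _ hx => Or.inr hx)
  · exact (stub4 Lay c.hLay μ c.hμ u₀ c.hcode c.h_error g A _ _ h).mono (fun _ hx => Or.inr hx)
/-- From 0x113c3e to the segment's exits. -/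
theorem onward2 {Lay : Layout} {μ : Microarch} {u₀ : State} (c : Ctx Lay μ u₀) (g : Ghost) (A : Arena × List Obj) (v : State)
    (hm : SegMid u₀ g A pcC2 0 v) : ReachVia Lay μ WayInv v (fun w => At4 u₀ g w ∨ AtERR u₀ g w) := by
  refine (chunk2 Lay c.hLay μ c.hμ u₀ c.hcode c.h_get32 g A 0 v hm).trans ?_
  intro w hw
  rcases hw with h | h
  · exact onward3 c g A w h
  · exact (stub2 Lay c.hLay μ c.hμ u₀ c.hcode c.h_error g A _ _ h).mono (fun _ hx => Or.inr hx)
/-- From 0x113c29 to the segment's exits. -/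
theorem onward1 {Lay : Layout} {μ : Microarch} {u₀ : State} (c : Ctx Lay μ u₀) (g : Ghost) (A : Arena × List Obj) (v : State)
    (hm : SegMid u₀ g A pcC1 0 v) : ReachVia Lay μ WayInv v (fun w => At4 u₀ g w ∨ AtERR u₀ g w) := by
  refine (chunk1 Lay c.hLay μ c.hμ u₀ c.hcode c.h_validate g A 0 v hm).trans ?_
  intro w hw
  rcases hw with h | h
  · exact onward2 c g A w h
  · exact (stub1 Lay c.hLay μ c.hμ u₀ c.hcode c.h_error g A _ _ h).mono (fun _ hx => Or.inr hx)
/-- From the segment's entry 0x113c0c to its exits. -/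
theorem onward0 {Lay : Layout} {μ : Microarch} {u₀ : State} (c : Ctx Lay μ u₀) (g : Ghost) (A : Arena × List Obj) (v : State)
    (hm : SegMid u₀ g A pc_3 0 v) : ReachVia Lay μ WayInv v (fun w => At4 u₀ g w ∨ AtERR u₀ g w) := by
  refine (chunk0 Lay c.hLay μ c.hμ u₀ c.hcode c.h_getn g A 0 v hm).trans ?_
  intro w hw
  rcases hw with h | h
  · exact onward1 c g A w h
  · exact (stub0 Lay c.hLay μ c.hμ u₀ c.hcode c.h_error g A _ _ h).mono (fun _ hx => Or.inr hx)

end Vorbis.Spec.start_decoder_3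

/-- Segment 3 of `start_decoder` (0x113c0c … 0x113d3f ∨ the common epilogue 0x113b22): from `At3` (`SD 0`, `next_seg = 0`) to `At4`
(`SD 1`: HD1 – HD3) or, through one of the ten error stubs, to `AtERR` with eax = 0 (SD.ERR). -/
theorem Vorbis.Spec.Worked.start_decoder_3_ok : Vorbis.Spec.start_decoder_3.Statement := by
  intro Lay hLay μ hμ u₀ hcode h_getn h_validate h_get32 h_get8 h_store4 h_error g v hat
  obtain ⟨A, hb⟩ := hat
  exact Vorbis.Spec.start_decoder_3.onward0 ⟨hLay, hμ, hcode, h_getn, h_validate, h_get32, h_get8, h_store4, h_error⟩ g A v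
    (Vorbis.Spec.start_decoder_3.SegMid.of_body3 hb)
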